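-- pv_equiv track=rewrite | github.com/strangem1n/Pystudy | 프로그래머스/2/154540. 무인도 여행/무인도 여행.py | solution
-- ===== SOURCE A (Python) =====
-- di = [1, 0, -1, 0]
--
-- dj = [0, 1, 0, -1]
--
-- def solution(maps):
--     r = len(maps)
--     c = len(maps[0])
--
--     maps = [list(map(lambda x: 0 if x == 'X' else int(x), m)) for m in maps]
--
--     answer = []
--     for i in range(r):
--         for j in range(c):
--             if maps[i][j] != 0:
--                 res = 0
--                 stack = [(i, j)]
--                 while stack:
--                     i, j = stack[-1]
--                     res += maps[i][j]
--                     maps[i][j] = 0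
--                     for k in range(4):
--                         ni, nj = i+di[k], j+dj[k]
--                         if 0 <= ni < r and 0 <= nj < c and maps[ni][nj] > 0:
--                             stack.append((ni, nj))
--                             break
--                     else:
--                          stack.pop()
--                 answer.append(res)
--     if not answer:
--         return [-1]
--     answer.sort()
--     return answer
-- ===== SOURCE B (Python) =====
-- def solution(maps):
--     r, c = len(maps), len(maps[0])
--     grid = [[0 if ch == 'X' else int(ch) for ch in row] for row in maps]
--
--     # union-find over the r*c cells; the smaller root is pointed at the larger
--     parent = list(range(r * c))
--
--     def find(x):
--         while parent[x] != x:
--             x = parent[x]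
--         return x
--
--     def union(a, b):
--         ra, rb = find(a), find(b)
--         if ra != rb:
--             parent[min(ra, rb)] = max(ra, rb)
--
--     for i in range(r):
--         for j in range(c):
--             if grid[i][j] > 0:
--                 if i + 1 < r and grid[i + 1][j] > 0:
--                     union(i * c + j, (i + 1) * c + j)
--                 if j + 1 < c and grid[i][j + 1] > 0:
--                     union(i * c + j, i * c + j + 1)
--
--     sums = {}
--     for i in range(r):
--         for j in range(c):
--             if grid[i][j] > 0:
--                 root = find(i * c + j)
--                 sums[root] = sums.get(root, 0) + grid[i][j]
--
--     return sorted(sums.values()) if sums else [-1]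
-- ===== Notes on version B (the rewrite author's own statement) =====
-- stated objective: alternative
-- what changed: Replaced the mutating stack-DFS flood fill with a union-find over the r*c cells (union each positive cell with its right/down positive neighbours, then one pass summing values into a dict keyed by root); grid is never mutated during the scan.
import Mathlib
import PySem

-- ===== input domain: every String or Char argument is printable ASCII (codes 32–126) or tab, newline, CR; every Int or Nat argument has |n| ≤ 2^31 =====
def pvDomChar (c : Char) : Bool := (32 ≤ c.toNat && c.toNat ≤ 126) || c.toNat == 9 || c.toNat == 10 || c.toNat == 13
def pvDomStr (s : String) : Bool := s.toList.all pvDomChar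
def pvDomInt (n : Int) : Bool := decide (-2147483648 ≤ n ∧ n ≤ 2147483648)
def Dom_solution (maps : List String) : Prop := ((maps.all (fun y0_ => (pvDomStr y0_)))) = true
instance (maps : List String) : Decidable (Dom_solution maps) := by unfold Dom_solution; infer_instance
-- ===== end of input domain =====

-- B replaces A's mutating stack-DFS flood fill by a union-find over the r*c cells; equal return value, and neither version mutates the caller's list.

-- shared cell getter: maps[i][j] (all accesses both programs make are bounds-checked first, so the default is never observed inside Pre_)
def pvGet (g : List (List Int)) (i j : Nat) : Int := (g.getD i []).getD j 0

-- ===== PORT A =====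
def pvDi : List Int := [1, 0, -1, 0]
def pvDj : List Int := [0, 1, 0, -1]

-- maps[i][j] = 0  (in-range assignment)
def pvSet (g : List (List Int)) (i j : Nat) (x : Int) : List (List Int) :=
  g.set i ((g.getD i []).set j x)

-- 0 if x == 'X' else int(x)  (exact on Pre_'s digit chars)
def pvCellA (ch : Char) : Int := if ch = 'X' then 0 else ((ch.toNat : Int) - 48)

-- the 'for k in range(4): … break / else: pop' neighbour scan
def pvNbrA (r c : Nat) (g : List (List Int)) (i j : Nat) : List Nat → Option (Nat × Nat)
  | [] => none
  | k :: ks =>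
    let ni : Int := (i : Int) + pvDi.getD k 0
    let nj : Int := (j : Int) + pvDj.getD k 0
    if 0 ≤ ni ∧ ni < (r : Int) ∧ 0 ≤ nj ∧ nj < (c : Int) ∧ pvGet g ni.toNat nj.toNat > 0
    then some (ni.toNat, nj.toNat)
    else pvNbrA r c g i j ks

-- the 'while stack:' loop; fuel 5*r*c+4 is proved sufficient below (the loop measure never exceeds it)
def pvFillA (r c : Nat) : Nat → List (List Int) → List (Nat × Nat) → Int → Int × List (List Int)
  | 0, g, _, res => (res, g)
  | _+1, g, [], res => (res, g)
  | fuel+1, g, (i, j) :: rest, res =>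
    let res' := res + pvGet g i j
    let g' := pvSet g i j 0
    match pvNbrA r c g' i j [0, 1, 2, 3] with
    | some p => pvFillA r c fuel g' (p :: (i, j) :: rest) res'
    | none => pvFillA r c fuel g' rest res'

def solution (maps : List String) : List Int :=
  let r := maps.length
  let c := (maps.headD "").toList.length
  let g0 := maps.map (fun m => m.toList.map pvCellA)
  let st := (List.range r).foldl (fun st i =>
    (List.range c).foldl (fun st j =>
      if pvGet st.1 i j ≠ 0 then
        let p := pvFillA r c (5 * (r * c) + 4) st.1 [(i, j)] 0
        (p.2, st.2 ++ [p.1])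
      else st) st) (g0, ([] : List Int))
  if st.2 = [] then [-1] else PySem.List.sorted st.2 (fun x => x) false

-- ===== PORT B =====
-- find(x): while parent[x] != x: x = parent[x]  (fuel n suffices: parents strictly increase)
def pvRootB (parent : List Nat) : Nat → Nat → Nat
  | 0, x => x
  | fuel+1, x => if parent.getD x x = x then x else pvRootB parent fuel (parent.getD x x)

-- union(a, b): parent[min(ra, rb)] = max(ra, rb)
def pvUnionB (parent : List Nat) (n a b : Nat) : List Nat :=
  let ra := pvRootB parent n a
  let rb := pvRootB parent n b
  if ra ≠ rb then parent.set (min ra rb) (max ra rb) else parent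

def solution_alt (maps : List String) : List Int :=
  let r := maps.length
  let c := (maps.headD "").toList.length
  let grid := maps.map (fun row => row.toList.map (fun ch => if ch = 'X' then 0 else ((ch.toNat : Int) - 48)))
  let n := r * c
  let parent := (List.range r).foldl (fun par i =>
    (List.range c).foldl (fun par j =>
      if pvGet grid i j > 0 then
        let par1 := if i + 1 < r ∧ pvGet grid (i + 1) j > 0 then pvUnionB par n (i * c + j) ((i + 1) * c + j) else par
        if j + 1 < c ∧ pvGet grid i (j + 1) > 0 then pvUnionB par1 n (i * c + j) (i * c + j + 1) else par1
      else par) par) (List.range n)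
  let sums := (List.range r).foldl (fun d i =>
    (List.range c).foldl (fun d j =>
      if pvGet grid i j > 0 then d.modify (pvRootB parent n (i * c + j)) 0 (· + pvGet grid i j) else d) d)
    (PySem.Dict.empty : PySem.Dict Nat Int)
  if sums.size = 0 then [-1] else PySem.List.sorted sums.values (fun x => x) false

-- ===== PRECONDITION & SPEC =====
-- Pre_ excludes exactly the inputs where A raises: empty maps (IndexError on maps[0]), rows shorter
-- than the first row (IndexError), and characters other than 'X' and the digits '0'-'9' (ValueError in int()).
def Pre_solution (maps : List String) : Prop :=
  maps ≠ [] ∧ (maps.all (fun m => ((maps.headD "").toList.length ≤ m.toList.length) &&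
    m.toList.all (fun ch => (ch == 'X') || (decide ('0' ≤ ch) && decide (ch ≤ '9'))))) = true
instance (maps : List String) : Decidable (Pre_solution maps) := by unfold Pre_solution; infer_instance

def pvWitness_solution : List String := ["X11X0", "1X22X"]

def Spec_solution (maps : List String) (out : List Int) : Prop := out = solution_alt maps
instance (maps : List String) (out : List Int) : Decidable (Spec_solution maps out) := by unfold Spec_solution; infer_instance

-- ===== CLAIM (what is proved, stated in full; the proofs are below) =====
def Claim_equal_solution : Prop := ∀ (maps : List String), Dom_solution maps → Pre_solution maps → Spec_solution maps (solution maps)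

-- ===== LEMMAS AND PROOFS =====


/- ===================== abstract layer (proof helpers) ===================== -/

def pvShape (r c : Nat) (g : List (List Int)) : Prop :=
  g.length = r ∧ ∀ row ∈ g, c ≤ row.length

def pvInB (r c : Nat) (p : Nat × Nat) : Prop := p.1 < r ∧ p.2 < c

def pvPos (r c : Nat) (G : List (List Int)) (p : Nat × Nat) : Prop :=
  pvInB r c p ∧ 0 < pvGet G p.1 p.2

def pvAdj (r c : Nat) (G : List (List Int)) (p q : Nat × Nat) : Prop :=
  pvPos r c G p ∧ pvPos r c G q ∧
    ((p.1 = q.1 ∧ (p.2 = q.2 + 1 ∨ q.2 = p.2 + 1)) ∨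
     (p.2 = q.2 ∧ (p.1 = q.1 + 1 ∨ q.1 = p.1 + 1)))

def pvConn (r c : Nat) (G : List (List Int)) : Nat × Nat → Nat × Nat → Prop :=
  Relation.ReflTransGen (pvAdj r c G)

noncomputable def pvComp (r c : Nat) (G : List (List Int)) (s : Nat × Nat) : Finset (Nat × Nat) :=
  @Finset.filter _ (fun p => pvConn r c G s p) (fun _ => Classical.propDecidable _)
    (Finset.range r ×ˢ Finset.range c)

noncomputable def pvCompSum (r c : Nat) (G : List (List Int)) (s : Nat × Nat) : Int :=
  ∑ p ∈ pvComp r c G s, pvGet G p.1 p.2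

noncomputable def pvRepList (r c : Nat) (G : List (List Int)) :
    List (Nat × Nat) → Finset (Nat × Nat) → List (Nat × Nat)
  | [], _ => []
  | p :: ps, W =>
    @ite _ (pvPos r c G p ∧ p ∉ W) (Classical.propDecidable _)
      (p :: pvRepList r c G ps (W ∪ pvComp r c G p))
      (pvRepList r c G ps W)

noncomputable def pvWAcc (r c : Nat) (G : List (List Int)) :
    List (Nat × Nat) → Finset (Nat × Nat) → Finset (Nat × Nat)
  | [], W => W
  | p :: ps, W =>
    @ite _ (pvPos r c G p ∧ p ∉ W) (Classical.propDecidable _)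
      (pvWAcc r c G ps (W ∪ pvComp r c G p))
      (pvWAcc r c G ps W)

def pvCells (r c : Nat) : List (Nat × Nat) :=
  (List.range r).flatMap (fun i => (List.range c).map (fun j => (i, j)))

/- ===== basic grid lemmas ===== -/

lemma pvShape_pvSet (r c : Nat) (g : List (List Int)) (h : pvShape r c g) (i j : Nat) (x : Int) :
    pvShape r c (pvSet g i j x) := by
  obtain ⟨hl, hr⟩ := h
  by_cases hi : i < g.length
  · refine ⟨by simpa [pvSet] using hl, ?_⟩
    intro row hrow
    rcases List.mem_or_eq_of_mem_set hrow with h1 | h1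
    · exact hr _ h1
    · subst h1
      simp only [List.length_set]
      exact hr _ (by rw [List.getD_eq_getElem _ _ hi]; exact List.getElem_mem _)
  · unfold pvSet
    rw [List.set_eq_of_length_le (by omega)]
    exact ⟨hl, hr⟩

lemma pvGet_pvSet (r c : Nat) (g : List (List Int)) (h : pvShape r c g) (i j : Nat)
    (hi : i < r) (hj : j < c) (x : Int) (i' j' : Nat) :
    pvGet (pvSet g i j x) i' j' = if i' = i ∧ j' = j then x else pvGet g i' j' := by
  obtain ⟨hl, hr⟩ := h
  have hig : i < g.length := by omega
  have hrow : c ≤ (g.getD i []).length := hr _ (by rw [List.getD_eq_getElem _ _ hig]; exact List.getElem_mem _)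
  unfold pvGet pvSet
  simp only [List.getD_eq_getElem?_getD, List.getElem?_set]
  by_cases hii : i = i'
  · subst hii
    have hb : j < (g[i]?.getD []).length := by
      rw [← List.getD_eq_getElem?_getD]; omega
    have hb2 : j < g[i].length := by simpa [List.getElem?_eq_getElem hig] using hb
    by_cases hjj : j = j'
    · subst hjj
      simp [hig, hb2]
    · simp [hjj, Ne.symm hjj, hig]
  · split_ifs with h
    · exact absurd h.1.symm hii
    · rfl

lemma pvGet_nonneg (g : List (List Int)) (h : ∀ row ∈ g, ∀ x ∈ row, 0 ≤ x) (i j : Nat) :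
    0 ≤ pvGet g i j := by
  unfold pvGet
  by_cases hi : i < g.length
  · have hmem : g.getD i [] ∈ g := by rw [List.getD_eq_getElem _ _ hi]; exact List.getElem_mem _
    by_cases hj : j < (g.getD i []).length
    · exact h _ hmem _ (by rw [List.getD_eq_getElem _ _ hj]; exact List.getElem_mem _)
    · rw [List.getD_eq_default (g.getD i []) 0 (by omega)]
  · rw [List.getD_eq_default g [] (show g.length ≤ i by omega)]
    simp

/- ===== connectivity lemmas ===== -/

lemma pvAdj_symm (r c : Nat) (G : List (List Int)) {p q : Nat × Nat} (h : pvAdj r c G p q) :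
    pvAdj r c G q p := by
  obtain ⟨h1, h2, h3⟩ := h
  exact ⟨h2, h1, by tauto⟩

lemma pvConn_symm (r c : Nat) (G : List (List Int)) {p q : Nat × Nat} (h : pvConn r c G p q) :
    pvConn r c G q p := by
  induction h with
  | refl => exact Relation.ReflTransGen.refl
  | tail _ hadj ih =>
    exact Relation.ReflTransGen.trans (Relation.ReflTransGen.single (pvAdj_symm r c G hadj)) ih

lemma pvConn_pos (r c : Nat) (G : List (List Int)) {p q : Nat × Nat} (hp : pvPos r c G p)
    (h : pvConn r c G p q) : pvPos r c G q := by
  induction h with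
  | refl => exact hp
  | tail _ hadj _ => exact hadj.2.1

lemma mem_pvComp' (r c : Nat) (G : List (List Int)) (s p : Nat × Nat) :
    p ∈ pvComp r c G s ↔ (p ∈ Finset.range r ×ˢ Finset.range c) ∧ pvConn r c G s p := by
  simp only [pvComp, Finset.mem_filter]

lemma mem_pvComp (r c : Nat) (G : List (List Int)) (s : Nat × Nat) (hs : pvPos r c G s)
    (p : Nat × Nat) : p ∈ pvComp r c G s ↔ pvConn r c G s p := by
  simp only [pvComp, Finset.mem_filter, Finset.mem_product, Finset.mem_range]
  constructor
  · exact fun h => h.2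
  · intro h
    have := pvConn_pos r c G hs h
    exact ⟨⟨this.1.1, this.1.2⟩, h⟩

lemma pvComp_card_le (r c : Nat) (G : List (List Int)) (s : Nat × Nat) :
    (pvComp r c G s).card ≤ r * c := by
  calc (pvComp r c G s).card ≤ (Finset.range r ×ˢ Finset.range c).card :=
        Finset.card_le_card (fun p hp => ((mem_pvComp' r c G s p).mp hp).1)
    _ = r * c := by simp

-- split a restricted path at a removed vertex
lemma rpath_avoid {α : Type} (A : α → α → Prop) (S : α → Prop) (x : α) :
    ∀ {a b : α}, Relation.ReflTransGen (fun u v => A u v ∧ S v) a b →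
      Relation.ReflTransGen (fun u v => A u v ∧ S v ∧ v ≠ x) a b ∨
      Relation.ReflTransGen (fun u v => A u v ∧ S v ∧ v ≠ x) x b := by
  intro a b h
  induction h with
  | refl => exact Or.inl Relation.ReflTransGen.refl
  | @tail b' c' _ hbc ih =>
    by_cases hcx : c' = x
    · subst hcx
      exact Or.inr Relation.ReflTransGen.refl
    · rcases ih with ih | ih
      · exact Or.inl (Relation.ReflTransGen.tail ih ⟨hbc.1, hbc.2, hcx⟩)
      · exact Or.inr (Relation.ReflTransGen.tail ih ⟨hbc.1, hbc.2, hcx⟩)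

lemma pvConn_rpath (r c : Nat) (G : List (List Int)) (s : Nat × Nat) (hs : pvPos r c G s)
    {p : Nat × Nat} (h : pvConn r c G s p) :
    Relation.ReflTransGen (fun x y => pvAdj r c G x y ∧ y ∈ pvComp r c G s ∧ y ∉ (∅ : Finset (Nat × Nat))) s p := by
  induction h with
  | refl => exact Relation.ReflTransGen.refl
  | @tail b' c' hb hadj ih =>
    refine Relation.ReflTransGen.tail ih ⟨hadj, ?_, by simp⟩
    rw [mem_pvComp r c G s hs]
    exact Relation.ReflTransGen.tail hb hadj

/- ===== neighbour scan lemmas ===== -/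

def pvNbrRel (i j : Nat) (q : Nat × Nat) : Prop :=
  (q.1 = i + 1 ∧ q.2 = j) ∨ (q.1 = i ∧ q.2 = j + 1) ∨
  (i = q.1 + 1 ∧ q.2 = j) ∨ (q.1 = i ∧ j = q.2 + 1)

lemma pvNbrA_some (r c : Nat) (g : List (List Int)) (i j : Nat) (q : Nat × Nat)
    (h : pvNbrA r c g i j [0, 1, 2, 3] = some q) :
    q.1 < r ∧ q.2 < c ∧ 0 < pvGet g q.1 q.2 ∧ pvNbrRel i j q := by
  unfold pvNbrRel
  simp only [pvNbrA, pvDi, pvDj, List.getD_cons_zero, List.getD_cons_succ] at h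
  split_ifs at h with h0 h1 h2 h3
  · obtain ⟨c1, c2, c3, c4, c5⟩ := h0
    cases h
    refine ⟨by omega, by omega, c5, ?_⟩
    left; constructor <;> simp <;> omega
  · obtain ⟨c1, c2, c3, c4, c5⟩ := h1
    cases h
    refine ⟨by omega, by omega, c5, ?_⟩
    right; left; constructor <;> simp <;> omega
  · obtain ⟨c1, c2, c3, c4, c5⟩ := h2
    cases h
    refine ⟨by omega, by omega, c5, ?_⟩
    right; right; left; constructor <;> simp <;> omega
  · obtain ⟨c1, c2, c3, c4, c5⟩ := h3
    cases h
    refine ⟨by omega, by omega, c5, ?_⟩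
    right; right; right; constructor <;> simp <;> omega

lemma pvNbrA_none (r c : Nat) (g : List (List Int)) (i j : Nat)
    (h : pvNbrA r c g i j [0, 1, 2, 3] = none) :
    ∀ q : Nat × Nat, q.1 < r → q.2 < c → pvNbrRel i j q → pvGet g q.1 q.2 ≤ 0 := by
  intro q hq1 hq2 hrel
  by_contra hpos
  push_neg at hpos
  simp only [pvNbrA, pvDi, pvDj, List.getD_cons_zero, List.getD_cons_succ] at h
  split_ifs at h with h0 h1 h2 h3
  rcases hrel with ⟨e1, e2⟩ | ⟨e1, e2⟩ | ⟨e1, e2⟩ | ⟨e1, e2⟩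
  · exact h0 ⟨by omega, by omega, by omega, by omega,
      by rw [show ((i : Int) + 1).toNat = q.1 by omega, show ((j : Int) + 0).toNat = q.2 by omega]; exact hpos⟩
  · exact h1 ⟨by omega, by omega, by omega, by omega,
      by rw [show ((i : Int) + 0).toNat = q.1 by omega, show ((j : Int) + 1).toNat = q.2 by omega]; exact hpos⟩
  · exact h2 ⟨by omega, by omega, by omega, by omega,
      by rw [show ((i : Int) + -1).toNat = q.1 by omega, show ((j : Int) + 0).toNat = q.2 by omega]; exact hpos⟩
  · exact h3 ⟨by omega, by omega, by omega, by omega,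
      by rw [show ((i : Int) + 0).toNat = q.1 by omega, show ((j : Int) + -1).toNat = q.2 by omega]; exact hpos⟩

lemma pvAdj_of_nbrRel (r c : Nat) (G : List (List Int)) (i j : Nat) (q : Nat × Nat)
    (hp : pvPos r c G (i, j)) (hq : pvPos r c G q) (hrel : pvNbrRel i j q) :
    pvAdj r c G (i, j) q := by
  refine ⟨hp, hq, ?_⟩
  unfold pvNbrRel at hrel
  simp only
  omega

lemma nbrRel_of_pvAdj (r c : Nat) (G : List (List Int)) (i j : Nat) (q : Nat × Nat)
    (h : pvAdj r c G (i, j) q) : pvNbrRel i j q := by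
  obtain ⟨_, _, h3⟩ := h
  unfold pvNbrRel
  simp only at h3
  omega

/- ===== the fill loop ===== -/

lemma pvFillA_main (r c : Nat) (G : List (List Int)) (hGs : pvShape r c G)
    (s : Nat × Nat) (hsP : pvPos r c G s) (Z0 : Finset (Nat × Nat))
    (hZ0 : ∀ p ∈ pvComp r c G s, p ∉ Z0) :
    ∀ fuel (Zf : Finset (Nat × Nat)) (g : List (List Int)) (stack : List (Nat × Nat)) (res : Int),
      pvShape r c g →
      (∀ i j, pvGet g i j = if (i, j) ∈ Z0 ∪ Zf then 0 else pvGet G i j) →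
      Zf ⊆ pvComp r c G s →
      (∀ p ∈ stack, p ∈ pvComp r c G s) →
      (∀ p ∈ stack.tail, p ∈ Zf) →
      (∀ p ∈ pvComp r c G s, p ∉ Zf →
        ∃ t ∈ stack, Relation.ReflTransGen
          (fun x y => pvAdj r c G x y ∧ y ∈ pvComp r c G s ∧ y ∉ Zf) t p) →
      5 * ((pvComp r c G s).card - Zf.card) + stack.length +
        (match stack with | [] => 0 | h :: _ => if h ∈ Zf then 2 else 0) ≤ fuel →
      (pvFillA r c fuel g stack res).1 = res + ∑ p ∈ pvComp r c G s \ Zf, pvGet G p.1 p.2 ∧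
      pvShape r c (pvFillA r c fuel g stack res).2 ∧
      (∀ i j, pvGet (pvFillA r c fuel g stack res).2 i j =
        if (i, j) ∈ Z0 ∪ pvComp r c G s then 0 else pvGet G i j) := by
  intro fuel
  induction fuel with
  | zero =>
    intro Zf g stack res hsh hrepr hZf hstack htail hesc hfuel
    match stack with
    | [] =>
      have hcomp : pvComp r c G s ⊆ Zf := by
        intro p hp
        by_contra hno
        obtain ⟨t, ht, _⟩ := hesc p hp hno
        exact absurd ht (List.not_mem_nil)
      have hZeq : Zf = pvComp r c G s := Finset.Subset.antisymm hZf hcomp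
      subst hZeq
      refine ⟨by simp [pvFillA], by simpa [pvFillA] using hsh, ?_⟩
      simpa [pvFillA] using hrepr
    | (i, j) :: rest =>
      exfalso
      simp only [List.length_cons] at hfuel
      omega
  | succ fuel ih =>
    intro Zf g stack res hsh hrepr hZf hstack htail hesc hfuel
    match stack with
    | [] =>
      have hcomp : pvComp r c G s ⊆ Zf := by
        intro p hp
        by_contra hno
        obtain ⟨t, ht, _⟩ := hesc p hp hno
        exact absurd ht (List.not_mem_nil)
      have hZeq : Zf = pvComp r c G s := Finset.Subset.antisymm hZf hcomp
      subst hZeq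
      refine ⟨by simp [pvFillA], by simpa [pvFillA] using hsh, ?_⟩
      simpa [pvFillA] using hrepr
    | (i, j) :: rest =>
      -- facts about the top of the stack
      have htop : (i, j) ∈ pvComp r c G s := hstack _ (List.mem_cons_self)
      have htopP : pvPos r c G (i, j) :=
        pvConn_pos r c G hsP ((mem_pvComp r c G s hsP _).mp htop)
      have hiR : i < r := htopP.1.1
      have hjR : j < c := htopP.1.2
      have htopZ0 : (i, j) ∉ Z0 := hZ0 _ htop
      -- the new visited set
      set Z' : Finset (Nat × Nat) := insert (i, j) Zf with hZ'def
      have hZ'sub : Z' ⊆ pvComp r c G s := by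
        intro p hp
        rcases Finset.mem_insert.mp hp with h | h
        · exact h ▸ htop
        · exact hZf h
      have hZfZ' : Zf ⊆ Z' := Finset.subset_insert _ _
      -- value accounting
      have hval : res + pvGet g i j + ∑ p ∈ pvComp r c G s \ Z', pvGet G p.1 p.2
          = res + ∑ p ∈ pvComp r c G s \ Zf, pvGet G p.1 p.2 := by
        by_cases hin : (i, j) ∈ Zf
        · have : Z' = Zf := Finset.insert_eq_self.mpr hin
          rw [this, hrepr i j, if_pos (Finset.mem_union_right _ hin)]
          ring
        · have hmemd : (i, j) ∈ pvComp r c G s \ Zf := Finset.mem_sdiff.mpr ⟨htop, hin⟩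
          have herase : pvComp r c G s \ Z' = (pvComp r c G s \ Zf).erase (i, j) := by
            ext p
            simp only [Finset.mem_sdiff, Finset.mem_erase, hZ'def, Finset.mem_insert]
            tauto
          have hsum : ∑ p ∈ pvComp r c G s \ Zf, pvGet G p.1 p.2
              = pvGet G i j + ∑ p ∈ (pvComp r c G s \ Zf).erase (i, j), pvGet G p.1 p.2 :=
            (Finset.add_sum_erase _ (fun p => pvGet G p.1 p.2) hmemd).symm
          rw [hrepr i j, if_neg (by simp [htopZ0, hin]), herase, hsum]
          ring
      -- the updated grid
      have hsh' : pvShape r c (pvSet g i j 0) := pvShape_pvSet r c g hsh i j 0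
      have hrepr' : ∀ i' j', pvGet (pvSet g i j 0) i' j' =
          if (i', j') ∈ Z0 ∪ Z' then 0 else pvGet G i' j' := by
        intro i' j'
        rw [pvGet_pvSet r c g hsh i j hiR hjR 0 i' j']
        by_cases he : i' = i ∧ j' = j
        · obtain ⟨e1, e2⟩ := he
          subst e1; subst e2
          rw [if_pos ⟨rfl, rfl⟩, if_pos (Finset.mem_union_right _ (Finset.mem_insert_self _ _))]
        · rw [if_neg he, hrepr i' j']
          have hiff : ((i', j') ∈ Z0 ∪ Zf) ↔ ((i', j') ∈ Z0 ∪ Z') := by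
            simp only [Finset.mem_union, hZ'def, Finset.mem_insert]
            constructor
            · tauto
            · rintro (h | (h | h))
              · tauto
              · exact absurd (Prod.mk.injEq .. ▸ h) (by simpa using he)
              · tauto
          exact if_congr hiff rfl rfl
      -- neighbours of the top are in the component
      have hadj_mem : ∀ q, pvAdj r c G (i, j) q → q ∈ pvComp r c G s := by
        intro q hadj
        rw [mem_pvComp r c G s hsP]
        exact Relation.ReflTransGen.tail ((mem_pvComp r c G s hsP _).mp htop) hadj
      -- cardinal facts for the fuel bound
      have hcardZf : Zf.card ≤ (pvComp r c G s).card := Finset.card_le_card hZf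
      have hcardZ' : Z'.card ≤ (pvComp r c G s).card := Finset.card_le_card hZ'sub
      cases hnb : pvNbrA r c (pvSet g i j 0) i j [0, 1, 2, 3] with
      | some q =>
        -- the pushed neighbour
        obtain ⟨hq1, hq2, hq3, hq4⟩ := pvNbrA_some r c (pvSet g i j 0) i j q hnb
        have hqZ : q ∉ Z0 ∪ Z' := by
          intro hmem
          rw [hrepr' q.1 q.2] at hq3
          · rw [if_pos (by simpa using hmem)] at hq3
            omega
        have hqG : 0 < pvGet G q.1 q.2 := by
          rw [hrepr' q.1 q.2, if_neg (by simpa using hqZ)] at hq3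
          exact hq3
        have hqP : pvPos r c G q := ⟨⟨hq1, hq2⟩, hqG⟩
        have hqadj : pvAdj r c G (i, j) q :=
          pvAdj_of_nbrRel r c G i j q htopP hqP hq4
        have hqmem : q ∈ pvComp r c G s := hadj_mem q hqadj
        have hqZ' : q ∉ Z' := fun h => hqZ (Finset.mem_union_right _ h)
        have hstep := ih Z' (pvSet g i j 0) (q :: (i, j) :: rest) (res + pvGet g i j)
          hsh' hrepr' hZ'sub
          (by
            intro p hp
            rcases List.mem_cons.mp hp with h | hp2
            · exact h ▸ hqmem
            · exact hstack _ hp2)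
          (by
            intro p hp
            rcases List.mem_cons.mp hp with h | hp2
            · exact h ▸ Finset.mem_insert_self _ _
            · exact hZfZ' (htail _ hp2))
          (by
            intro p hp hpZ'
            have hpZf : p ∉ Zf := fun h => hpZ' (hZfZ' h)
            obtain ⟨t, ht, hpath⟩ := hesc p hp hpZf
            rcases rpath_avoid (pvAdj r c G)
                (fun y => y ∈ pvComp r c G s ∧ y ∉ Zf) (i, j) hpath with hp1 | hp1
            · refine ⟨t, List.mem_cons_of_mem _ ht, ?_⟩
              refine Relation.ReflTransGen.mono ?_ hp1
              rintro x y ⟨a1, ⟨a2, a3⟩, a4⟩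
              exact ⟨a1, a2, by simp [hZ'def, a3, a4]⟩
            · refine ⟨(i, j), List.mem_cons_of_mem _ (List.mem_cons_self), ?_⟩
              refine Relation.ReflTransGen.mono ?_ hp1
              rintro x y ⟨a1, ⟨a2, a3⟩, a4⟩
              exact ⟨a1, a2, by simp [hZ'def, a3, a4]⟩)
          (by
            -- fuel bound
            have hflag : (match ((i, j) :: rest : List (Nat × Nat)) with
                | [] => 0 | h :: _ => if h ∈ Zf then 2 else 0) =
                (if (i, j) ∈ Zf then 2 else 0) := rfl
            rw [hflag] at hfuel
            have hflag' : (match (q :: (i, j) :: rest : List (Nat × Nat)) with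
                | [] => 0 | h :: _ => if h ∈ Z' then 2 else 0) = 0 := by
              simp only [if_neg hqZ']
            rw [hflag']
            by_cases hin : (i, j) ∈ Zf
            · have : Z' = Zf := Finset.insert_eq_self.mpr hin
              rw [if_pos hin] at hfuel
              rw [this]
              simp only [List.length_cons] at hfuel ⊢
              omega
            · have hcard : Z'.card = Zf.card + 1 := Finset.card_insert_of_notMem hin
              rw [if_neg hin] at hfuel
              simp only [List.length_cons] at hfuel ⊢
              omega)
        simp only [pvFillA, hnb]
        refine ⟨?_, hstep.2.1, ?_⟩
        · rw [hstep.1, ← hval]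
        · intro i' j'
          exact hstep.2.2 i' j' 
      | none =>
        -- pop: all neighbours already cleared
        have hnbAll : ∀ q, pvAdj r c G (i, j) q → q ∈ Z' := by
          intro q hadj
          have hqP := hadj.2.1
          have hle := pvNbrA_none r c (pvSet g i j 0) i j hnb q hqP.1.1 hqP.1.2
            (nbrRel_of_pvAdj r c G i j q hadj)
          rw [hrepr' q.1 q.2] at hle
          by_cases hmem : (q.1, q.2) ∈ Z0 ∪ Z'
          · rcases Finset.mem_union.mp hmem with h | h
            · exact absurd h (hZ0 _ (hadj_mem q hadj))
            · exact h
          · rw [if_neg hmem] at hle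
            exact absurd hqP.2 (by omega)
        have hstep := ih Z' (pvSet g i j 0) rest (res + pvGet g i j)
          hsh' hrepr' hZ'sub
          (fun p hp => hstack _ (List.mem_cons_of_mem _ hp))
          (by
            intro p hp
            exact hZfZ' (htail _ (List.mem_of_mem_tail hp)))
          (by
            intro p hp hpZ'
            have hpZf : p ∉ Zf := fun h => hpZ' (hZfZ' h)
            obtain ⟨t, ht, hpath⟩ := hesc p hp hpZf
            have hfromtop : ∀ {b : Nat × Nat},
                Relation.ReflTransGen (fun u v => pvAdj r c G u v ∧
                  (v ∈ pvComp r c G s ∧ v ∉ Zf) ∧ v ≠ (i, j)) (i, j) b → b ∉ Z' → False := by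
              intro b hpath2 hbZ'
              rcases Relation.ReflTransGen.cases_head hpath2 with he | ⟨w, ⟨hw1, ⟨_, hw3⟩, hw4⟩, _⟩
              · exact hbZ' (he ▸ Finset.mem_insert_self _ _)
              · have := hnbAll w hw1
                rcases Finset.mem_insert.mp this with h | h
                · exact hw4 h
                · exact hw3 h
            rcases rpath_avoid (pvAdj r c G)
                (fun y => y ∈ pvComp r c G s ∧ y ∉ Zf) (i, j) hpath with hp1 | hp1
            · rcases List.mem_cons.mp ht with hteq | htrest
              · exact absurd (hfromtop (hteq ▸ hp1) hpZ') (fun h => h)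
              · refine ⟨t, htrest, ?_⟩
                refine Relation.ReflTransGen.mono ?_ hp1
                rintro x y ⟨a1, ⟨a2, a3⟩, a4⟩
                exact ⟨a1, a2, by simp [hZ'def, a3, a4]⟩
            · exact absurd (hfromtop hp1 hpZ') (fun h => h))
          (by
            have hflag : (match ((i, j) :: rest : List (Nat × Nat)) with
                | [] => 0 | h :: _ => if h ∈ Zf then 2 else 0) =
                (if (i, j) ∈ Zf then 2 else 0) := rfl
            rw [hflag] at hfuel
            have hflag' : (match rest with
                | [] => 0 | h :: _ => if h ∈ Z' then 2 else 0) ≤ 2 := by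
              cases rest with
              | nil => exact Nat.zero_le _
              | cons a t =>
                show (if a ∈ Z' then 2 else 0) ≤ 2
                split <;> omega
            by_cases hin : (i, j) ∈ Zf
            · have : Z' = Zf := Finset.insert_eq_self.mpr hin
              rw [if_pos hin] at hfuel
              rw [this] at hflag' ⊢
              simp only [List.length_cons] at hfuel
              omega
            · have hcard : Z'.card = Zf.card + 1 := Finset.card_insert_of_notMem hin
              rw [if_neg hin] at hfuel
              simp only [List.length_cons] at hfuel
              omega)
        simp only [pvFillA, hnb]
        refine ⟨?_, hstep.2.1, ?_⟩
        · rw [hstep.1, ← hval]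
        · intro i' j'
          exact hstep.2.2 i' j' 

/- ===== flattening the nested loops ===== -/

lemma foldl_range_range {σ : Type} (r c : Nat) (F : σ → Nat → Nat → σ) (init : σ) :
    (List.range r).foldl (fun s i => (List.range c).foldl (fun s j => F s i j) s) init
      = (pvCells r c).foldl (fun s p => F s p.1 p.2) init := by
  induction r generalizing init with
  | zero => simp [pvCells]
  | succ n ihr =>
    simp only [pvCells, List.range_succ, List.flatMap_append, List.foldl_append] at ihr ⊢
    rw [ihr]
    simp [List.foldl_map]

lemma mem_pvCells (r c : Nat) (p : Nat × Nat) : p ∈ pvCells r c ↔ p.1 < r ∧ p.2 < c := by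
  simp only [pvCells, List.mem_flatMap, List.mem_map, List.mem_range]
  constructor
  · rintro ⟨i, hi, j, hj, rfl⟩
    exact ⟨hi, hj⟩
  · intro ⟨h1, h2⟩
    exact ⟨p.1, h1, p.2, h2, rfl⟩

/- ===== the outer scan of A ===== -/

lemma outerA_main (r c : Nat) (G : List (List Int)) (hGs : pvShape r c G)
    (hGnn : ∀ i j, 0 ≤ pvGet G i j) :
    ∀ (L : List (Nat × Nat)) (W : Finset (Nat × Nat)) (g : List (List Int)) (ans : List Int),
      (∀ p ∈ L, pvInB r c p) →
      (∀ p ∈ W, pvPos r c G p) →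
      (∀ p q, p ∈ W → pvConn r c G p q → q ∈ W) →
      pvShape r c g →
      (∀ i j, pvGet g i j = if (i, j) ∈ W then 0 else pvGet G i j) →
      (L.foldl (fun st p =>
        if pvGet st.1 p.1 p.2 ≠ 0 then
          let q := pvFillA r c (5 * (r * c) + 4) st.1 [(p.1, p.2)] 0
          (q.2, st.2 ++ [q.1])
        else st) (g, ans)).2
        = ans ++ (pvRepList r c G L W).map (pvCompSum r c G) := by
  intro L
  induction L with
  | nil =>
    intro W g ans _ _ _ _ _
    simp [pvRepList]
  | cons p L' ihL =>
    intro W g ans hL hWpos hWcl hsh hrepr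
    have hpInB : pvInB r c p := hL p (List.mem_cons_self)
    have hgp : pvGet g p.1 p.2 = if p ∈ W then 0 else pvGet G p.1 p.2 := by
      have := hrepr p.1 p.2
      simpa using this
    simp only [List.foldl_cons]
    by_cases hc : pvPos r c G p ∧ p ∉ W
    · -- a new seed: run the fill
      have hpP := hc.1
      have hne : pvGet g p.1 p.2 ≠ 0 := by
        rw [hgp, if_neg hc.2]
        exact ne_of_gt hpP.2
      rw [if_pos hne]
      have hZ0 : ∀ q ∈ pvComp r c G p, q ∉ W := by
        intro q hq hqW
        exact hc.2 (hWcl q p hqW (pvConn_symm r c G ((mem_pvComp r c G p hpP q).mp hq)))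
      have hfill := pvFillA_main r c G hGs p hpP W hZ0 (5 * (r * c) + 4) ∅ g [(p.1, p.2)] 0
        hsh
        (by intro i j; rw [hrepr i j]; simp)
        (by simp)
        (by
          intro q hq
          simp only [List.mem_cons, List.not_mem_nil, or_false] at hq
          rw [hq, mem_pvComp r c G p hpP]
          exact Relation.ReflTransGen.refl)
        (by simp)
        (by
          intro q hq _
          refine ⟨(p.1, p.2), List.mem_cons_self, ?_⟩
          exact pvConn_rpath r c G p hpP ((mem_pvComp r c G p hpP q).mp hq))
        (by
          have h1 := pvComp_card_le r c G p
          have hflag : (match ([(p.1, p.2)] : List (Nat × Nat)) with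
              | [] => 0 | h :: _ => if h ∈ (∅ : Finset (Nat × Nat)) then 2 else 0) = 0 := by
            simp
          rw [hflag]
          simp only [List.length_cons, List.length_nil, Finset.card_empty]
          omega)
      obtain ⟨hv, hsh2, hrepr2⟩ := hfill
      have hW'pos : ∀ q ∈ W ∪ pvComp r c G p, pvPos r c G q := by
        intro q hq
        rcases Finset.mem_union.mp hq with h | h
        · exact hWpos q h
        · exact pvConn_pos r c G hpP ((mem_pvComp r c G p hpP q).mp h)
      have hW'cl : ∀ a b, a ∈ W ∪ pvComp r c G p → pvConn r c G a b → b ∈ W ∪ pvComp r c G p := by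
        intro a b ha hab
        rcases Finset.mem_union.mp ha with h | h
        · exact Finset.mem_union_left _ (hWcl a b h hab)
        · refine Finset.mem_union_right _ ?_
          rw [mem_pvComp r c G p hpP]
          exact Relation.ReflTransGen.trans ((mem_pvComp r c G p hpP a).mp h) hab
      have hrec := ihL (W ∪ pvComp r c G p)
        (pvFillA r c (5 * (r * c) + 4) g [(p.1, p.2)] 0).2
        (ans ++ [(pvFillA r c (5 * (r * c) + 4) g [(p.1, p.2)] 0).1])
        (fun q hq => hL q (List.mem_cons_of_mem _ hq)) hW'pos hW'cl hsh2 hrepr2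
      rw [hrec]
      rw [pvRepList, if_pos hc]
      simp only [List.map_cons]
      rw [hv]
      simp [pvCompSum]
    · -- nothing to do at this cell
      have hzero : pvGet g p.1 p.2 = 0 := by
        by_cases hw : p ∈ W
        · rw [hgp, if_pos hw]
        · rw [hgp, if_neg hw]
          have hnp : ¬ pvPos r c G p := fun h => hc ⟨h, hw⟩
          have := hGnn p.1 p.2
          have hle : ¬ 0 < pvGet G p.1 p.2 := fun h => hnp ⟨hpInB, h⟩
          omega
      rw [if_neg (by simpa using hzero)]
      rw [pvRepList, if_neg hc]
      exact ihL W g ans (fun q hq => hL q (List.mem_cons_of_mem _ hq)) hWpos hWcl hsh hrepr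

/- ===== union-find lemmas ===== -/

def pvPWf (n : Nat) (par : List Nat) : Prop :=
  par.length = n ∧ ∀ k, k < n → k ≤ par.getD k k ∧ par.getD k k < n

lemma pvRootB_base (n : Nat) (par : List Nat) (h : pvPWf n par) :
    ∀ fuel x, x < n → n - x ≤ fuel →
      (par.getD (pvRootB par fuel x) (pvRootB par fuel x) = pvRootB par fuel x ∧
       x ≤ pvRootB par fuel x ∧ pvRootB par fuel x < n ∧
       ∀ fuel', n - x ≤ fuel' → pvRootB par fuel' x = pvRootB par fuel x) := by
  intro fuel
  induction fuel with
  | zero =>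
    intro x hx hf
    omega
  | succ fuel ihf =>
    intro x hx hf
    by_cases hroot : par.getD x x = x
    · have hred : pvRootB par (fuel + 1) x = x := by
        simp only [pvRootB]
        rw [if_pos hroot]
      refine ⟨by rw [hred, hroot], by rw [hred], by rw [hred]; exact hx, ?_⟩
      intro fuel' hf'
      have : fuel' ≠ 0 := by omega
      obtain ⟨f2, rfl⟩ := Nat.exists_eq_succ_of_ne_zero this
      rw [hred]
      simp only [pvRootB]
      rw [if_pos hroot]
    · have hlt : x < par.getD x x := lt_of_le_of_ne ((h.2 x hx).1) (Ne.symm hroot)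
      have hxn : par.getD x x < n := (h.2 x hx).2
      have hrec := ihf (par.getD x x) hxn (by omega)
      obtain ⟨r1, r2, r3, r4⟩ := hrec
      have hred : pvRootB par (fuel + 1) x = pvRootB par fuel (par.getD x x) := by
        simp only [pvRootB]
        rw [if_neg hroot]
      refine ⟨by rw [hred]; exact r1, by rw [hred]; omega, by rw [hred]; exact r3, ?_⟩
      intro fuel' hf'
      have : fuel' ≠ 0 := by omega
      obtain ⟨f2, rfl⟩ := Nat.exists_eq_succ_of_ne_zero this
      have hred' : pvRootB par (f2 + 1) x = pvRootB par f2 (par.getD x x) := by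
        simp only [pvRootB]
        rw [if_neg hroot]
      rw [hred, hred']
      rw [r4 f2 (by omega), r4 fuel (by omega)]

lemma pvRootB_isRoot (n : Nat) (par : List Nat) (h : pvPWf n par) (x : Nat) (hx : x < n) :
    par.getD (pvRootB par n x) (pvRootB par n x) = pvRootB par n x ∧
    x ≤ pvRootB par n x ∧ pvRootB par n x < n := by
  obtain ⟨r1, r2, r3, _⟩ := pvRootB_base n par h n x hx (by omega)
  exact ⟨r1, r2, r3⟩

lemma pvRootB_of_root (par : List Nat) (fuel x : Nat)
    (hx : par.getD x x = x) : pvRootB par fuel x = x := by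
  cases fuel with
  | zero => rfl
  | succ f =>
    simp only [pvRootB]
    rw [if_pos hx]

lemma pvRootB_unfold (n : Nat) (par : List Nat) (h : pvPWf n par) (x : Nat) (hx : x < n)
    (hnr : par.getD x x ≠ x) : pvRootB par n x = pvRootB par n (par.getD x x) := by
  have hlt : x < par.getD x x := lt_of_le_of_ne ((h.2 x hx).1) (Ne.symm hnr)
  have hxn : par.getD x x < n := (h.2 x hx).2
  obtain ⟨_, _, _, r4⟩ := pvRootB_base n par h n x hx (by omega)
  obtain ⟨_, _, _, r4'⟩ := pvRootB_base n par h n (par.getD x x) hxn (by omega)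
  have h1 : pvRootB par n x = pvRootB par (n - x) x := by
    rw [r4 (n - x) (by omega)]
  cases hnx : n - x with
  | zero => omega
  | succ f =>
    rw [h1, hnx]
    simp only [pvRootB]
    rw [if_neg hnr]
    rw [r4' f (by omega)]

lemma getD_set_nat (par : List Nat) (a v k : Nat) (ha : a < par.length) :
    (par.set a v).getD k k = if k = a then v else par.getD k k := by
  by_cases hk : k = a
  · subst hk
    simp [List.getD_eq_getElem?_getD, List.getElem?_set_self ha]
  · simp only [List.getD_eq_getElem?_getD, List.getElem?_set_ne (fun h => hk h.symm), if_neg hk]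

lemma pvRoot_set (n : Nat) (par : List Nat) (h : pvPWf n par) (ra rb : Nat)
    (hra : ra < n) (hrb : rb < n) (hraR : par.getD ra ra = ra) (hrbR : par.getD rb rb = rb)
    (hlt : ra < rb) :
    pvPWf n (par.set ra rb) ∧
    ∀ x, x < n → pvRootB (par.set ra rb) n x =
      if pvRootB par n x = ra then rb else pvRootB par n x := by
  have hlen : par.length = n := h.1
  have hwf' : pvPWf n (par.set ra rb) := by
    refine ⟨by simp [hlen], ?_⟩
    intro k hk
    rw [getD_set_nat par ra rb k (by omega)]
    by_cases hk2 : k = ra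
    · rw [if_pos hk2]
      omega
    · rw [if_neg hk2]
      exact h.2 k hk
  refine ⟨hwf', ?_⟩
  have key : ∀ d x, x < n → n - x ≤ d →
      pvRootB (par.set ra rb) n x = if pvRootB par n x = ra then rb else pvRootB par n x := by
    intro d
    induction d with
    | zero => intro x hx hd; omega
    | succ d ihd =>
      intro x hx hd
      have hg : (par.set ra rb).getD x x = if x = ra then rb else par.getD x x :=
        getD_set_nat par ra rb x (by omega)
      by_cases hxra : x = ra
      · have hg2 : (par.set ra rb).getD x x = rb := by rw [hg, if_pos hxra]
        have hs1 : pvRootB (par.set ra rb) n x = pvRootB (par.set ra rb) n rb := by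
          rw [pvRootB_unfold n _ hwf' x hx (by rw [hg2]; omega), hg2]
        have hrbR' : (par.set ra rb).getD rb rb = rb := by
          rw [getD_set_nat par ra rb rb (by omega), if_neg (by omega), hrbR]
        have hxroot : par.getD x x = x := by rw [hxra]; exact hraR
        rw [hs1, pvRootB_of_root _ _ _ hrbR', pvRootB_of_root _ _ _ hxroot, if_pos hxra]
      · by_cases hfix : par.getD x x = x
        · have hg2 : (par.set ra rb).getD x x = x := by rw [hg, if_neg hxra, hfix]
          rw [pvRootB_of_root _ _ _ hg2, pvRootB_of_root _ _ _ hfix, if_neg hxra]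
        · have hg2 : (par.set ra rb).getD x x = par.getD x x := by rw [hg, if_neg hxra]
          have hlt2 : x < par.getD x x := lt_of_le_of_ne ((h.2 x hx).1) (Ne.symm hfix)
          have hxn2 : par.getD x x < n := (h.2 x hx).2
          have hs1 : pvRootB (par.set ra rb) n x = pvRootB (par.set ra rb) n (par.getD x x) := by
            rw [pvRootB_unfold n _ hwf' x hx (by rw [hg2]; exact hfix), hg2]
          rw [hs1, pvRootB_unfold n par h x hx hfix]
          exact ihd (par.getD x x) hxn2 (by omega)
  intro x hx
  exact key n x hx (by omega)

lemma pvUnionB_spec (n : Nat) (par : List Nat) (h : pvPWf n par) (a b : Nat)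
    (ha : a < n) (hb : b < n) :
    pvPWf n (pvUnionB par n a b) ∧
    ∀ x y, x < n → y < n →
      (pvRootB (pvUnionB par n a b) n x = pvRootB (pvUnionB par n a b) n y ↔
       (pvRootB par n x = pvRootB par n y ∨
        (pvRootB par n x = pvRootB par n a ∧ pvRootB par n b = pvRootB par n y) ∨
        (pvRootB par n x = pvRootB par n b ∧ pvRootB par n a = pvRootB par n y))) := by
  obtain ⟨hraR, _, hran⟩ := pvRootB_isRoot n par h a ha
  obtain ⟨hrbR, _, hrbn⟩ := pvRootB_isRoot n par h b hb
  by_cases heq : pvRootB par n a = pvRootB par n b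
  · have hu : pvUnionB par n a b = par := by
      simp only [pvUnionB]
      rw [if_neg (by omega)]
    rw [hu]
    refine ⟨h, ?_⟩
    intro x y hx hy
    constructor
    · intro hxy
      exact Or.inl hxy
    · intro hcase
      omega
  · have hmm : min (pvRootB par n a) (pvRootB par n b) < max (pvRootB par n a) (pvRootB par n b) := by omega
    have hset := pvRoot_set n par h
      (min (pvRootB par n a) (pvRootB par n b)) (max (pvRootB par n a) (pvRootB par n b))
      (by omega) (by omega)
      (by rcases Nat.le_total (pvRootB par n a) (pvRootB par n b) with hle | hle
          · rw [Nat.min_eq_left hle]; exact hraR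
          · rw [Nat.min_eq_right hle]; exact hrbR)
      (by rcases Nat.le_total (pvRootB par n a) (pvRootB par n b) with hle | hle
          · rw [Nat.max_eq_right hle]; exact hrbR
          · rw [Nat.max_eq_left hle]; exact hraR)
      hmm
    have hu : pvUnionB par n a b =
        par.set (min (pvRootB par n a) (pvRootB par n b)) (max (pvRootB par n a) (pvRootB par n b)) := by
      simp only [pvUnionB]
      rw [if_pos heq]
    rw [hu]
    refine ⟨hset.1, ?_⟩
    intro x y hx hy
    rw [hset.2 x hx, hset.2 y hy]
    split_ifs <;> omega

/- ===== the union phase ===== -/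

-- one cell's processing in B's first loop, uncurried
def pvUStep (r c n : Nat) (grid : List (List Int)) (par : List Nat) (i j : Nat) : List Nat :=
  if pvGet grid i j > 0 then
    let par1 := if i + 1 < r ∧ pvGet grid (i + 1) j > 0 then pvUnionB par n (i * c + j) ((i + 1) * c + j) else par
    if j + 1 < c ∧ pvGet grid i (j + 1) > 0 then pvUnionB par1 n (i * c + j) (i * c + j + 1) else par1
  else par

lemma pvPWf_range (n : Nat) : pvPWf n (List.range n) := by
  refine ⟨List.length_range, ?_⟩
  intro k hk
  have : (List.range n).getD k k = k := by
    rw [List.getD_eq_getElem _ _ (by simpa using hk)]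
    simp
  omega

lemma idx_lt (r c : Nat) (p : Nat × Nat) (h : pvInB r c p) : p.1 * c + p.2 < r * c := by
  have h1 : p.1 + 1 ≤ r := h.1
  have h2 : p.2 < c := h.2
  calc p.1 * c + p.2 < p.1 * c + c := by omega
    _ = (p.1 + 1) * c := by ring
    _ ≤ r * c := Nat.mul_le_mul_right c h1

lemma getD_range_self (n k : Nat) (hk : k < n) : (List.range n).getD k k = k := by
  rw [List.getD_eq_getElem _ _ (by simpa using hk)]
  simp

lemma cell_idx (c : Nat) (p : Nat × Nat) (h2 : p.2 < c) :
    ((p.1 * c + p.2) / c, (p.1 * c + p.2) % c) = p := by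
  have hc : 0 < c := by omega
  have h1 : (p.1 * c + p.2) / c = p.1 := by
    rw [Nat.mul_comm p.1 c, Nat.mul_add_div hc, Nat.div_eq_of_lt h2]
    omega
  have h2' : (p.1 * c + p.2) % c = p.2 := by
    rw [Nat.mul_comm p.1 c, Nat.mul_add_mod, Nat.mod_eq_of_lt h2]
  rw [h1, h2']

-- one union between connected cells preserves the soundness invariant
lemma sound_step (r c : Nat) (G : List (List Int)) (par : List Nat) (a b : Nat)
    (hwf : pvPWf (r * c) par) (ha : a < r * c) (hb : b < r * c)
    (hconn : pvConn r c G (a / c, a % c) (b / c, b % c))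
    (hinv : ∀ x y, x < r * c → y < r * c → pvRootB par (r * c) x = pvRootB par (r * c) y →
      x = y ∨ pvConn r c G (x / c, x % c) (y / c, y % c)) :
    pvPWf (r * c) (pvUnionB par (r * c) a b) ∧
    (∀ x y, x < r * c → y < r * c →
      pvRootB (pvUnionB par (r * c) a b) (r * c) x = pvRootB (pvUnionB par (r * c) a b) (r * c) y →
      x = y ∨ pvConn r c G (x / c, x % c) (y / c, y % c)) := by
  obtain ⟨hwf', hrel⟩ := pvUnionB_spec (r * c) par hwf a b ha hb
  refine ⟨hwf', ?_⟩
  intro x y hx hy hxy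
  have hcase := (hrel x y hx hy).mp hxy
  have hxa : pvRootB par (r * c) x = pvRootB par (r * c) a →
      x = a ∨ pvConn r c G (x / c, x % c) (a / c, a % c) := hinv x a hx ha
  rcases hcase with hc1 | ⟨hc1, hc2⟩ | ⟨hc1, hc2⟩
  · exact hinv x y hx hy hc1
  · -- x ~ a, b ~ y
    have h1 := hinv x a hx ha hc1
    have h2 := hinv b y hb hy hc2
    right
    have hxa' : pvConn r c G (x / c, x % c) (a / c, a % c) := by
      rcases h1 with h | h
      · rw [h]
        exact Relation.ReflTransGen.refl
      · exact h
    have hby' : pvConn r c G (b / c, b % c) (y / c, y % c) := by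
      rcases h2 with h | h
      · rw [h]
        exact Relation.ReflTransGen.refl
      · exact h
    exact Relation.ReflTransGen.trans hxa' (Relation.ReflTransGen.trans hconn hby')
  · -- x ~ b, a ~ y
    have h1 := hinv x b hx hb hc1
    have h2 := hinv a y ha hy hc2
    right
    have hxb' : pvConn r c G (x / c, x % c) (b / c, b % c) := by
      rcases h1 with h | h
      · rw [h]
        exact Relation.ReflTransGen.refl
      · exact h
    have hay' : pvConn r c G (a / c, a % c) (y / c, y % c) := by
      rcases h2 with h | h
      · rw [h]
        exact Relation.ReflTransGen.refl
      · exact h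
    exact Relation.ReflTransGen.trans hxb'
      (Relation.ReflTransGen.trans (pvConn_symm r c G hconn) hay')

-- one step of the union loop preserves wf and soundness
lemma ustep_sound (r c : Nat) (G : List (List Int)) (par : List Nat) (p : Nat × Nat)
    (hp : pvInB r c p) (hwf : pvPWf (r * c) par)
    (hinv : ∀ x y, x < r * c → y < r * c → pvRootB par (r * c) x = pvRootB par (r * c) y →
      x = y ∨ pvConn r c G (x / c, x % c) (y / c, y % c)) :
    pvPWf (r * c) (pvUStep r c (r * c) G par p.1 p.2) ∧
    (∀ x y, x < r * c → y < r * c →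
      pvRootB (pvUStep r c (r * c) G par p.1 p.2) (r * c) x =
      pvRootB (pvUStep r c (r * c) G par p.1 p.2) (r * c) y →
      x = y ∨ pvConn r c G (x / c, x % c) (y / c, y % c)) := by
  unfold pvUStep
  by_cases h0 : pvGet G p.1 p.2 > 0
  swap
  · rw [if_neg h0]
    exact ⟨hwf, hinv⟩
  rw [if_pos h0]
  have hpP : pvPos r c G p := ⟨hp, h0⟩
  have hidxp : p.1 * c + p.2 < r * c := idx_lt r c p hp
  have hdown : pvPWf (r * c) (if p.1 + 1 < r ∧ pvGet G (p.1 + 1) p.2 > 0 then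
        pvUnionB par (r * c) (p.1 * c + p.2) ((p.1 + 1) * c + p.2) else par) ∧
      (∀ x y, x < r * c → y < r * c →
        pvRootB (if p.1 + 1 < r ∧ pvGet G (p.1 + 1) p.2 > 0 then
          pvUnionB par (r * c) (p.1 * c + p.2) ((p.1 + 1) * c + p.2) else par) (r * c) x =
        pvRootB (if p.1 + 1 < r ∧ pvGet G (p.1 + 1) p.2 > 0 then
          pvUnionB par (r * c) (p.1 * c + p.2) ((p.1 + 1) * c + p.2) else par) (r * c) y →
        x = y ∨ pvConn r c G (x / c, x % c) (y / c, y % c)) := by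
    by_cases hd : p.1 + 1 < r ∧ pvGet G (p.1 + 1) p.2 > 0
    · rw [if_pos hd]
      have hqP : pvPos r c G (p.1 + 1, p.2) := ⟨⟨hd.1, hp.2⟩, hd.2⟩
      have hadj : pvAdj r c G p (p.1 + 1, p.2) := ⟨hpP, hqP, Or.inr ⟨rfl, Or.inr rfl⟩⟩
      refine sound_step r c G par _ _ hwf hidxp (idx_lt r c (p.1 + 1, p.2) ⟨hd.1, hp.2⟩) ?_ hinv
      rw [show ((p.1 * c + p.2) / c, (p.1 * c + p.2) % c) = p from cell_idx c p hp.2,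
        show (((p.1 + 1) * c + p.2) / c, ((p.1 + 1) * c + p.2) % c) = (p.1 + 1, p.2) from
          cell_idx c (p.1 + 1, p.2) hp.2]
      exact Relation.ReflTransGen.single hadj
    · rw [if_neg hd]
      exact ⟨hwf, hinv⟩
  by_cases hr : p.2 + 1 < c ∧ pvGet G p.1 (p.2 + 1) > 0
  · rw [if_pos hr]
    have hqP : pvPos r c G (p.1, p.2 + 1) := ⟨⟨hp.1, hr.1⟩, hr.2⟩
    have hadj : pvAdj r c G p (p.1, p.2 + 1) := ⟨hpP, hqP, Or.inl ⟨rfl, Or.inr rfl⟩⟩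
    have heq1 : p.1 * c + p.2 + 1 = p.1 * c + (p.2 + 1) := by omega
    refine sound_step r c G _ _ _ hdown.1 hidxp
      (by rw [heq1]; exact idx_lt r c (p.1, p.2 + 1) ⟨hp.1, hr.1⟩) ?_ hdown.2
    rw [heq1,
      show ((p.1 * c + p.2) / c, (p.1 * c + p.2) % c) = p from cell_idx c p hp.2,
      show ((p.1 * c + (p.2 + 1)) / c, (p.1 * c + (p.2 + 1)) % c) = (p.1, p.2 + 1) from
        cell_idx c (p.1, p.2 + 1) hr.1]
    exact Relation.ReflTransGen.single hadj
  · rw [if_neg hr]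
    exact hdown

lemma ustep_wf (r c : Nat) (G : List (List Int)) (par : List Nat) (p : Nat × Nat)
    (hp : pvInB r c p) (hwf : pvPWf (r * c) par) :
    pvPWf (r * c) (pvUStep r c (r * c) G par p.1 p.2) := by
  unfold pvUStep
  have hidxp : p.1 * c + p.2 < r * c := idx_lt r c p hp
  by_cases h0 : pvGet G p.1 p.2 > 0
  swap
  · rw [if_neg h0]; exact hwf
  rw [if_pos h0]
  have hwf1 : pvPWf (r * c) (if p.1 + 1 < r ∧ pvGet G (p.1 + 1) p.2 > 0 then
      pvUnionB par (r * c) (p.1 * c + p.2) ((p.1 + 1) * c + p.2) else par) := by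
    by_cases hd : p.1 + 1 < r ∧ pvGet G (p.1 + 1) p.2 > 0
    · rw [if_pos hd]
      exact (pvUnionB_spec (r * c) par hwf _ _ hidxp (idx_lt r c (p.1 + 1, p.2) ⟨hd.1, hp.2⟩)).1
    · rw [if_neg hd]; exact hwf
  by_cases hr : p.2 + 1 < c ∧ pvGet G p.1 (p.2 + 1) > 0
  · rw [if_pos hr]
    refine (pvUnionB_spec (r * c) _ hwf1 _ _ hidxp ?_).1
    have heq1 : p.1 * c + p.2 + 1 = p.1 * c + (p.2 + 1) := by omega
    rw [heq1]
    exact idx_lt r c (p.1, p.2 + 1) ⟨hp.1, hr.1⟩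
  · rw [if_neg hr]; exact hwf1

lemma ustep_mono (r c : Nat) (G : List (List Int)) (par : List Nat) (p : Nat × Nat)
    (hp : pvInB r c p) (hwf : pvPWf (r * c) par) (x y : Nat) (hx : x < r * c) (hy : y < r * c)
    (hxy : pvRootB par (r * c) x = pvRootB par (r * c) y) :
    pvRootB (pvUStep r c (r * c) G par p.1 p.2) (r * c) x =
    pvRootB (pvUStep r c (r * c) G par p.1 p.2) (r * c) y := by
  unfold pvUStep
  have hidxp : p.1 * c + p.2 < r * c := idx_lt r c p hp
  by_cases h0 : pvGet G p.1 p.2 > 0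
  swap
  · rw [if_neg h0]; exact hxy
  rw [if_pos h0]
  have hstep1 : pvPWf (r * c) (if p.1 + 1 < r ∧ pvGet G (p.1 + 1) p.2 > 0 then
        pvUnionB par (r * c) (p.1 * c + p.2) ((p.1 + 1) * c + p.2) else par) ∧
      pvRootB (if p.1 + 1 < r ∧ pvGet G (p.1 + 1) p.2 > 0 then
        pvUnionB par (r * c) (p.1 * c + p.2) ((p.1 + 1) * c + p.2) else par) (r * c) x =
      pvRootB (if p.1 + 1 < r ∧ pvGet G (p.1 + 1) p.2 > 0 then
        pvUnionB par (r * c) (p.1 * c + p.2) ((p.1 + 1) * c + p.2) else par) (r * c) y := by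
    by_cases hd : p.1 + 1 < r ∧ pvGet G (p.1 + 1) p.2 > 0
    · rw [if_pos hd]
      obtain ⟨hwf1, hrel1⟩ := pvUnionB_spec (r * c) par hwf _ _ hidxp
        (idx_lt r c (p.1 + 1, p.2) ⟨hd.1, hp.2⟩)
      exact ⟨hwf1, (hrel1 x y hx hy).mpr (Or.inl hxy)⟩
    · rw [if_neg hd]; exact ⟨hwf, hxy⟩
  by_cases hr : p.2 + 1 < c ∧ pvGet G p.1 (p.2 + 1) > 0
  · rw [if_pos hr]
    have heq1 : p.1 * c + p.2 + 1 = p.1 * c + (p.2 + 1) := by omega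
    obtain ⟨_, hrel2⟩ := pvUnionB_spec (r * c) _ hstep1.1 (p.1 * c + p.2) (p.1 * c + p.2 + 1)
      hidxp (by rw [heq1]; exact idx_lt r c (p.1, p.2 + 1) ⟨hp.1, hr.1⟩)
    exact (hrel2 x y hx hy).mpr (Or.inl hstep1.2)
  · rw [if_neg hr]; exact hstep1.2

-- soundness+wf invariant through the union fold
lemma uphase_sound (r c : Nat) (G : List (List Int)) :
    ∀ (L : List (Nat × Nat)) (par : List Nat),
      (∀ p ∈ L, pvInB r c p) → pvPWf (r * c) par →
      (∀ x y, x < r * c → y < r * c → pvRootB par (r * c) x = pvRootB par (r * c) y →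
        x = y ∨ pvConn r c G (x / c, x % c) (y / c, y % c)) →
      pvPWf (r * c) (L.foldl (fun par p => pvUStep r c (r * c) G par p.1 p.2) par) ∧
      (∀ x y, x < r * c → y < r * c →
        pvRootB (L.foldl (fun par p => pvUStep r c (r * c) G par p.1 p.2) par) (r * c) x =
        pvRootB (L.foldl (fun par p => pvUStep r c (r * c) G par p.1 p.2) par) (r * c) y →
        x = y ∨ pvConn r c G (x / c, x % c) (y / c, y % c)) := by
  intro L
  induction L with
  | nil => intro par _ hwf hinv; exact ⟨hwf, hinv⟩
  | cons a L ihL =>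
    intro par hL hwf hinv
    obtain ⟨hwf', hinv'⟩ := ustep_sound r c G par a (hL a (List.mem_cons_self)) hwf hinv
    exact ihL _ (fun q hq => hL q (List.mem_cons_of_mem _ hq)) hwf' hinv' 

-- rel monotonicity through the fold
lemma uphase_mono (r c : Nat) (G : List (List Int)) :
    ∀ (L : List (Nat × Nat)) (par : List Nat),
      (∀ p ∈ L, pvInB r c p) → pvPWf (r * c) par →
      ∀ x y, x < r * c → y < r * c → pvRootB par (r * c) x = pvRootB par (r * c) y →
        pvRootB (L.foldl (fun par p => pvUStep r c (r * c) G par p.1 p.2) par) (r * c) x =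
        pvRootB (L.foldl (fun par p => pvUStep r c (r * c) G par p.1 p.2) par) (r * c) y := by
  intro L
  induction L with
  | nil => intro par _ _ x y _ _ hxy; exact hxy
  | cons a L ihL =>
    intro par hL hwf x y hx hy hxy
    exact ihL _ (fun q hq => hL q (List.mem_cons_of_mem _ hq))
      (ustep_wf r c G par a (hL a (List.mem_cons_self)) hwf) x y hx hy
      (ustep_mono r c G par a (hL a (List.mem_cons_self)) hwf x y hx hy hxy)

lemma ustep_edge (r c : Nat) (G : List (List Int)) (par : List Nat) (p q : Nat × Nat)
    (hp : pvInB r c p) (hwf : pvPWf (r * c) par) (hpP : pvPos r c G p) (hqP : pvPos r c G q)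
    (hdir : (q.1 = p.1 + 1 ∧ q.2 = p.2) ∨ (q.1 = p.1 ∧ q.2 = p.2 + 1)) :
    pvRootB (pvUStep r c (r * c) G par p.1 p.2) (r * c) (p.1 * c + p.2) =
    pvRootB (pvUStep r c (r * c) G par p.1 p.2) (r * c) (q.1 * c + q.2) := by
  unfold pvUStep
  have hidxp : p.1 * c + p.2 < r * c := idx_lt r c p hp
  have hidxq : q.1 * c + q.2 < r * c := idx_lt r c q hqP.1
  rw [if_pos hpP.2]
  rcases hdir with ⟨e1, e2⟩ | ⟨e1, e2⟩
  · -- down neighbour: established by the first union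
    have hd : p.1 + 1 < r ∧ pvGet G (p.1 + 1) p.2 > 0 := by
      refine ⟨by have := hqP.1.1; omega, ?_⟩
      have := hqP.2
      rwa [e1, e2] at this
    rw [if_pos hd]
    have hidxq' : q.1 * c + q.2 = (p.1 + 1) * c + p.2 := by rw [e1, e2]
    obtain ⟨hwf1, hrel1⟩ := pvUnionB_spec (r * c) par hwf (p.1 * c + p.2) ((p.1 + 1) * c + p.2)
      hidxp (by rw [← hidxq']; exact hidxq)
    have hbase : pvRootB (pvUnionB par (r * c) (p.1 * c + p.2) ((p.1 + 1) * c + p.2)) (r * c) (p.1 * c + p.2)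
        = pvRootB (pvUnionB par (r * c) (p.1 * c + p.2) ((p.1 + 1) * c + p.2)) (r * c) ((p.1 + 1) * c + p.2) :=
      (hrel1 _ _ hidxp (by rw [← hidxq']; exact hidxq)).mpr (Or.inr (Or.inl ⟨rfl, rfl⟩))
    rw [hidxq']
    by_cases hr : p.2 + 1 < c ∧ pvGet G p.1 (p.2 + 1) > 0
    · rw [if_pos hr]
      have heq1 : p.1 * c + p.2 + 1 = p.1 * c + (p.2 + 1) := by omega
      obtain ⟨_, hrel2⟩ := pvUnionB_spec (r * c) _ hwf1 (p.1 * c + p.2) (p.1 * c + p.2 + 1)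
        hidxp (by rw [heq1]; exact idx_lt r c (p.1, p.2 + 1) ⟨hp.1, hr.1⟩)
      exact (hrel2 _ _ hidxp (by rw [← hidxq']; exact hidxq)).mpr (Or.inl hbase)
    · rw [if_neg hr]
      exact hbase
  · -- right neighbour: established by the second union
    have hr : p.2 + 1 < c ∧ pvGet G p.1 (p.2 + 1) > 0 := by
      refine ⟨by have := hqP.1.2; omega, ?_⟩
      have := hqP.2
      rwa [e1, e2] at this
    have hidxq' : q.1 * c + q.2 = p.1 * c + p.2 + 1 := by rw [e1, e2]; omega
    have hwf1 : pvPWf (r * c) (if p.1 + 1 < r ∧ pvGet G (p.1 + 1) p.2 > 0 then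
        pvUnionB par (r * c) (p.1 * c + p.2) ((p.1 + 1) * c + p.2) else par) := by
      by_cases hd : p.1 + 1 < r ∧ pvGet G (p.1 + 1) p.2 > 0
      · rw [if_pos hd]
        exact (pvUnionB_spec (r * c) par hwf _ _ hidxp (idx_lt r c (p.1 + 1, p.2) ⟨hd.1, hp.2⟩)).1
      · rw [if_neg hd]; exact hwf
    rw [if_pos hr]
    obtain ⟨_, hrel2⟩ := pvUnionB_spec (r * c) _ hwf1 (p.1 * c + p.2) (p.1 * c + p.2 + 1)
      hidxp (by rw [← hidxq']; exact hidxq)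
    rw [hidxq']
    exact (hrel2 _ _ hidxp (by rw [← hidxq']; exact hidxq)).mpr (Or.inr (Or.inl ⟨rfl, rfl⟩))

-- every down/right positive adjacency processed in L ends up related
lemma uphase_complete (r c : Nat) (G : List (List Int)) :
    ∀ (L : List (Nat × Nat)) (par : List Nat),
      (∀ p ∈ L, pvInB r c p) → pvPWf (r * c) par →
      ∀ p q : Nat × Nat, p ∈ L → pvPos r c G p → pvPos r c G q →
        ((q.1 = p.1 + 1 ∧ q.2 = p.2) ∨ (q.1 = p.1 ∧ q.2 = p.2 + 1)) →
        pvRootB (L.foldl (fun par p => pvUStep r c (r * c) G par p.1 p.2) par) (r * c) (p.1 * c + p.2) =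
        pvRootB (L.foldl (fun par p => pvUStep r c (r * c) G par p.1 p.2) par) (r * c) (q.1 * c + q.2) := by
  intro L
  induction L with
  | nil =>
    intro par _ _ p q hmem
    exact absurd hmem (List.not_mem_nil)
  | cons a L ihL =>
    intro par hL hwf p q hmem hpP hqP hdir
    have hInBa : pvInB r c a := hL a (List.mem_cons_self)
    rcases List.mem_cons.mp hmem with heq | hmem'
    · subst heq
      simp only [List.foldl_cons]
      exact uphase_mono r c G L (pvUStep r c (r * c) G par p.1 p.2)
        (fun x hx => hL x (List.mem_cons_of_mem _ hx))
        (ustep_wf r c G par p hInBa hwf) _ _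
        (idx_lt r c p hpP.1) (idx_lt r c q hqP.1)
        (ustep_edge r c G par p q hInBa hwf hpP hqP hdir)
    · simp only [List.foldl_cons]
      exact ihL (pvUStep r c (r * c) G par a.1 a.2)
        (fun x hx => hL x (List.mem_cons_of_mem _ hx))
        (ustep_wf r c G par a hInBa hwf) p q hmem' hpP hqP hdir

-- the final characterisation of B's union-find
lemma parF_rel_iff (r c : Nat) (G : List (List Int)) (p q : Nat × Nat)
    (hp : pvPos r c G p) (hq : pvPos r c G q) :
    (pvRootB ((pvCells r c).foldl (fun par p => pvUStep r c (r * c) G par p.1 p.2) (List.range (r * c))) (r * c) (p.1 * c + p.2) =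
     pvRootB ((pvCells r c).foldl (fun par p => pvUStep r c (r * c) G par p.1 p.2) (List.range (r * c))) (r * c) (q.1 * c + q.2))
    ↔ pvConn r c G p q := by
  have hcells : ∀ x ∈ pvCells r c, pvInB r c x := by
    intro x hx
    exact (mem_pvCells r c x).mp hx
  have hwf0 := pvPWf_range (r * c)
  have hinv0 : ∀ x y, x < r * c → y < r * c →
      pvRootB (List.range (r * c)) (r * c) x = pvRootB (List.range (r * c)) (r * c) y →
      x = y ∨ pvConn r c G (x / c, x % c) (y / c, y % c) := by
    intro x y hx hy hxy
    rw [pvRootB_of_root _ _ _ (getD_range_self _ _ hx),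
      pvRootB_of_root _ _ _ (getD_range_self _ _ hy)] at hxy
    exact Or.inl hxy
  constructor
  · intro hroot
    obtain ⟨_, hsound⟩ := uphase_sound r c G (pvCells r c) (List.range (r * c)) hcells hwf0 hinv0
    have := hsound _ _ (idx_lt r c p hp.1) (idx_lt r c q hq.1) hroot
    rcases this with heq | hconn
    · have : p = q := by
        have h1 := cell_idx c p hp.1.2
        have h2 := cell_idx c q hq.1.2
        rw [← h1, ← h2, heq]
      rw [this]
      exact Relation.ReflTransGen.refl
    · rwa [cell_idx c p hp.1.2, cell_idx c q hq.1.2] at hconn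
  · intro hconn
    induction hconn with
    | refl => rfl
    | @tail b q hb hadj ihb =>
      have hbP : pvPos r c G b := hadj.1
      have hqP : pvPos r c G q := hadj.2.1
      have hrel := ihb hbP
      refine Eq.trans hrel ?_
      have h3 := hadj.2.2
      rcases h3 with ⟨e1, e2⟩ | ⟨e1, e2⟩
      · -- same row
        rcases e2 with e2 | e2
        · -- b.2 = q.2 + 1 : q is left of b, so b is the right neighbour of q
          exact (uphase_complete r c G (pvCells r c) (List.range (r * c)) hcells hwf0 q b
            ((mem_pvCells r c q).mpr ⟨hqP.1.1, hqP.1.2⟩) hqP hbP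
            (Or.inr ⟨by omega, by omega⟩)).symm
        · exact uphase_complete r c G (pvCells r c) (List.range (r * c)) hcells hwf0 b q
            ((mem_pvCells r c b).mpr ⟨hbP.1.1, hbP.1.2⟩) hbP hqP
            (Or.inr ⟨by omega, by omega⟩)
      · -- same column
        rcases e2 with e2 | e2
        · exact (uphase_complete r c G (pvCells r c) (List.range (r * c)) hcells hwf0 q b
            ((mem_pvCells r c q).mpr ⟨hqP.1.1, hqP.1.2⟩) hqP hbP
            (Or.inl ⟨by omega, by omega⟩)).symm
        · exact uphase_complete r c G (pvCells r c) (List.range (r * c)) hcells hwf0 b q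
            ((mem_pvCells r c b).mpr ⟨hbP.1.1, hbP.1.2⟩) hbP hqP
            (Or.inl ⟨by omega, by omega⟩)

/- ===== repList / WAcc bookkeeping ===== -/

lemma pvWAcc_subset (r c : Nat) (G : List (List Int)) :
    ∀ (L : List (Nat × Nat)) (W : Finset (Nat × Nat)), W ⊆ pvWAcc r c G L W := by
  intro L
  induction L with
  | nil => intro W x hx; exact hx
  | cons a L ihL =>
    intro W x hx
    rw [pvWAcc]
    by_cases hc : pvPos r c G a ∧ a ∉ W
    · rw [if_pos hc]
      exact ihL _ (Finset.mem_union_left _ hx)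
    · rw [if_neg hc]
      exact ihL _ hx

lemma pvWAcc_closed (r c : Nat) (G : List (List Int)) :
    ∀ (L : List (Nat × Nat)) (W : Finset (Nat × Nat)),
      (∀ p q, p ∈ W → pvConn r c G p q → q ∈ W) →
      ∀ p q, p ∈ pvWAcc r c G L W → pvConn r c G p q → q ∈ pvWAcc r c G L W := by
  intro L
  induction L with
  | nil => intro W hW p q hp hpq; exact hW p q hp hpq
  | cons a L ihL =>
    intro W hW p q hp hpq
    rw [pvWAcc] at hp ⊢
    by_cases hc : pvPos r c G a ∧ a ∉ W
    · rw [if_pos hc] at hp ⊢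
      refine ihL _ ?_ p q hp hpq
      intro x y hx hxy
      rcases Finset.mem_union.mp hx with h | h
      · exact Finset.mem_union_left _ (hW x y h hxy)
      · refine Finset.mem_union_right _ ?_
        rw [mem_pvComp r c G a hc.1]
        exact Relation.ReflTransGen.trans ((mem_pvComp r c G a hc.1 x).mp h) hxy
    · rw [if_neg hc] at hp ⊢
      exact ihL _ hW p q hp hpq

lemma pvWAcc_mem_of_mem (r c : Nat) (G : List (List Int)) :
    ∀ (L : List (Nat × Nat)) (W : Finset (Nat × Nat)) (q : Nat × Nat),
      q ∈ L → pvPos r c G q → q ∈ pvWAcc r c G L W := by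
  intro L
  induction L with
  | nil => intro W q hq _; exact absurd hq (List.not_mem_nil)
  | cons a L ihL =>
    intro W q hq hqP
    rcases List.mem_cons.mp hq with heq | hmem
    · subst heq
      rw [pvWAcc]
      by_cases hc : pvPos r c G q ∧ q ∉ W
      · rw [if_pos hc]
        exact pvWAcc_subset r c G L _ (Finset.mem_union_right _
          ((mem_pvComp r c G q hqP q).mpr Relation.ReflTransGen.refl))
      · rw [if_neg hc]
        have hqW : q ∈ W := by
          by_contra hno
          exact hc ⟨hqP, hno⟩
        exact pvWAcc_subset r c G L W hqW
    · rw [pvWAcc]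
      by_cases hc : pvPos r c G a ∧ a ∉ W
      · rw [if_pos hc]
        exact ihL _ q hmem hqP
      · rw [if_neg hc]
        exact ihL _ q hmem hqP

lemma pvWAcc_conn_rep (r c : Nat) (G : List (List Int)) :
    ∀ (L : List (Nat × Nat)) (W : Finset (Nat × Nat)) (q : Nat × Nat),
      q ∈ pvWAcc r c G L W → q ∉ W → ∃ m ∈ pvRepList r c G L W, pvConn r c G m q := by
  intro L
  induction L with
  | nil => intro W q hq hnW; exact absurd hq hnW
  | cons a L ihL =>
    intro W q hq hnW
    rw [pvWAcc] at hq
    rw [pvRepList]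
    by_cases hc : pvPos r c G a ∧ a ∉ W
    · rw [if_pos hc] at hq ⊢
      by_cases hq2 : q ∈ W ∪ pvComp r c G a
      · rcases Finset.mem_union.mp hq2 with h | h
        · exact absurd h hnW
        · exact ⟨a, List.mem_cons_self, (mem_pvComp r c G a hc.1 q).mp h⟩
      · obtain ⟨m, hm, hconn⟩ := ihL _ q hq hq2
        exact ⟨m, List.mem_cons_of_mem _ hm, hconn⟩
    · rw [if_neg hc] at hq ⊢
      exact ihL _ q hq hnW

lemma pvRepList_mem (r c : Nat) (G : List (List Int)) :
    ∀ (L : List (Nat × Nat)) (W : Finset (Nat × Nat)) (m : Nat × Nat),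
      m ∈ pvRepList r c G L W → pvPos r c G m ∧ m ∈ L ∧ m ∉ W := by
  intro L
  induction L with
  | nil => intro W m hm; rw [pvRepList] at hm; exact absurd hm (List.not_mem_nil)
  | cons a L ihL =>
    intro W m hm
    rw [pvRepList] at hm
    by_cases hc : pvPos r c G a ∧ a ∉ W
    · rw [if_pos hc] at hm
      rcases List.mem_cons.mp hm with heq | hmem
      · subst heq
        exact ⟨hc.1, List.mem_cons_self, hc.2⟩
      · obtain ⟨h1, h2, h3⟩ := ihL _ m hmem
        refine ⟨h1, List.mem_cons_of_mem _ h2, fun hW => h3 (Finset.mem_union_left _ hW)⟩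
    · rw [if_neg hc] at hm
      obtain ⟨h1, h2, h3⟩ := ihL _ m hm
      exact ⟨h1, List.mem_cons_of_mem _ h2, h3⟩

lemma pvRepList_append (r c : Nat) (G : List (List Int)) :
    ∀ (Q L : List (Nat × Nat)) (W : Finset (Nat × Nat)),
      pvRepList r c G (Q ++ L) W = pvRepList r c G Q W ++ pvRepList r c G L (pvWAcc r c G Q W) := by
  intro Q
  induction Q with
  | nil => intro L W; rw [pvRepList, pvWAcc]; simp
  | cons a Q ihQ =>
    intro L W
    rw [List.cons_append, pvRepList, pvRepList, pvWAcc]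
    by_cases hc : pvPos r c G a ∧ a ∉ W
    · rw [if_pos hc, if_pos hc, if_pos hc, ihQ]
      simp
    · rw [if_neg hc, if_neg hc, if_neg hc, ihQ]

lemma pvRepList_pairwise (r c : Nat) (G : List (List Int)) :
    ∀ (L : List (Nat × Nat)) (W : Finset (Nat × Nat)),
      (∀ p q, p ∈ W → pvConn r c G p q → q ∈ W) →
      (pvRepList r c G L W).Pairwise (fun a b => ¬ pvConn r c G a b) := by
  intro L
  induction L with
  | nil => intro W _; rw [pvRepList]; exact List.Pairwise.nil
  | cons a L ihL =>
    intro W hW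
    rw [pvRepList]
    by_cases hc : pvPos r c G a ∧ a ∉ W
    · rw [if_pos hc]
      refine List.Pairwise.cons ?_ (ihL _ ?_)
      · intro m hm hconn
        obtain ⟨hmP, _, hmW⟩ := pvRepList_mem r c G L _ m hm
        exact hmW (Finset.mem_union_right _ ((mem_pvComp r c G a hc.1 m).mpr hconn))
      · intro x y hx hxy
        rcases Finset.mem_union.mp hx with h | h
        · exact Finset.mem_union_left _ (hW x y h hxy)
        · refine Finset.mem_union_right _ ?_
          rw [mem_pvComp r c G a hc.1]
          exact Relation.ReflTransGen.trans ((mem_pvComp r c G a hc.1 x).mp h) hxy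
    · rw [if_neg hc]
      exact ihL _ hW

/- ===== B's dict phase ===== -/

-- partial component sum of the processed prefix Q for a representative m, keyed by root
noncomputable def pvPSum (r c : Nat) (G : List (List Int)) (rootIdx : Nat × Nat → Nat)
    (Q : List (Nat × Nat)) (m : Nat × Nat) : Int :=
  ((Q.filter (fun p => decide (0 < pvGet G p.1 p.2) && (rootIdx p == rootIdx m))).map
    (fun p => pvGet G p.1 p.2)).sum

lemma pvPSum_append (r c : Nat) (G : List (List Int)) (f : Nat × Nat → Nat)
    (Q1 Q2 : List (Nat × Nat)) (m : Nat × Nat) :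
    pvPSum r c G f (Q1 ++ Q2) m = pvPSum r c G f Q1 m + pvPSum r c G f Q2 m := by
  unfold pvPSum
  rw [List.filter_append, List.map_append, List.sum_append]

lemma pvPSum_single (r c : Nat) (G : List (List Int)) (f : Nat × Nat → Nat)
    (p m : Nat × Nat) :
    pvPSum r c G f [p] m =
      if 0 < pvGet G p.1 p.2 ∧ f p = f m then pvGet G p.1 p.2 else 0 := by
  unfold pvPSum
  by_cases h1 : 0 < pvGet G p.1 p.2
  · by_cases h2 : f p = f m
    · rw [if_pos ⟨h1, h2⟩]
      simp [List.filter_cons, h1, h2]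
    · rw [if_neg (fun h => h2 h.2)]
      simp [List.filter_cons, h1, h2]
  · rw [if_neg (fun h => h1 h.1)]
    simp [List.filter_cons, h1]

lemma reps_keys_nodup (r c : Nat) (G : List (List Int)) (f : Nat × Nat → Nat)
    (hf : ∀ p q, pvPos r c G p → pvPos r c G q → (f p = f q ↔ pvConn r c G p q))
    (Q : List (Nat × Nat)) :
    ((pvRepList r c G Q ∅).map (fun m => f m)).Nodup := by
  have hpw := pvRepList_pairwise r c G Q ∅ (fun p q hp _ => absurd hp (Finset.notMem_empty p))
  rw [List.Nodup, List.pairwise_map]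
  refine List.Pairwise.imp_of_mem ?_ hpw
  intro a b ha hb hnc hfeq
  obtain ⟨haP, -, -⟩ := pvRepList_mem r c G Q ∅ a ha
  obtain ⟨hbP, -, -⟩ := pvRepList_mem r c G Q ∅ b hb
  exact hnc ((hf a b haP hbP).mp hfeq)

lemma dict_phase (r c : Nat) (G : List (List Int)) (f : Nat × Nat → Nat)
    (hf : ∀ p q, pvPos r c G p → pvPos r c G q → (f p = f q ↔ pvConn r c G p q)) :
    ∀ (L Q : List (Nat × Nat)) (d : PySem.Dict Nat Int),
      (∀ p ∈ L, pvInB r c p) →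
      (∀ p ∈ Q, pvInB r c p) →
      d.items = (pvRepList r c G Q ∅).map (fun m => (f m, pvPSum r c G f Q m)) →
      (L.foldl (fun d p => if pvGet G p.1 p.2 > 0 then
          d.modify (f p) 0 (· + pvGet G p.1 p.2) else d) d).items
        = (pvRepList r c G (Q ++ L) ∅).map (fun m => (f m, pvPSum r c G f (Q ++ L) m)) := by
  intro L
  induction L with
  | nil =>
    intro Q d _ _ hd
    simpa using hd
  | cons p L ihL =>
    intro Q d hL hQ hd
    have hpInB : pvInB r c p := hL p (List.mem_cons_self)
    have hclosed : ∀ a b, a ∈ (∅ : Finset (Nat × Nat)) → pvConn r c G a b → b ∈ (∅ : Finset (Nat × Nat)) :=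
      fun a b ha _ => absurd ha (Finset.notMem_empty a)
    have hQP : pvRepList r c G (Q ++ [p]) ∅ = pvRepList r c G Q ∅ ++ pvRepList r c G [p] (pvWAcc r c G Q ∅) :=
      pvRepList_append r c G Q [p] ∅
    have hstep : ((if pvGet G p.1 p.2 > 0 then
          d.modify (f p) 0 (· + pvGet G p.1 p.2) else d) : PySem.Dict Nat Int).items
        = (pvRepList r c G (Q ++ [p]) ∅).map (fun m => (f m, pvPSum r c G f (Q ++ [p]) m)) := by
      by_cases h0 : pvGet G p.1 p.2 > 0
      swap
      · -- water cell: nothing happens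
        rw [if_neg h0, hQP, pvRepList, if_neg (fun hcon => h0 hcon.1.2), pvRepList]
        rw [List.append_nil, hd]
        refine List.map_congr_left ?_
        intro m _
        rw [pvPSum_append, pvPSum_single, if_neg (fun hcon => h0 hcon.1)]
        simp
      rw [if_pos h0]
      have hpP : pvPos r c G p := ⟨hpInB, h0⟩
      have hnodup : ((pvRepList r c G Q ∅).map (fun m => f m)).Nodup :=
        reps_keys_nodup r c G f hf Q
      have hkeys : (PySem.Dict.keys d) = (pvRepList r c G Q ∅).map (fun m => f m) := by
        rw [PySem.Dict.keys, hd, List.map_map]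
        rfl
      have hkeysnd : (PySem.Dict.keys d).Nodup := by rw [hkeys]; exact hnodup
      by_cases hseen : p ∈ pvWAcc r c G Q ∅
      · -- p's component already has a representative m0
        obtain ⟨m0, hm0, hconn0⟩ := pvWAcc_conn_rep r c G Q ∅ p hseen (Finset.notMem_empty p)
        obtain ⟨hm0P, hm0Q, -⟩ := pvRepList_mem r c G Q ∅ m0 hm0
        have hfeq : f m0 = f p := (hf m0 p hm0P hpP).mpr hconn0
        have hcont : d.contains (f p) = true := by
          rw [PySem.Dict.contains_eq_decide_mem_keys, hkeys]
          simp only [decide_eq_true_eq, List.mem_map]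
          exact ⟨m0, hm0, hfeq⟩
        have hmem_items : (f p, pvPSum r c G f Q m0) ∈ d.items := by
          rw [hd, ← hfeq]
          exact List.mem_map_of_mem hm0
        have hgetD : d.getD (f p) 0 = pvPSum r c G f Q m0 :=
          PySem.Dict.getD_of_mem_items d hmem_items hkeysnd 0
        show (d.insert (f p) ((d.getD (f p) 0) + pvGet G p.1 p.2)).items = _
        rw [PySem.Dict.items_insert_of_contains d _ hcont, hgetD, hd, List.map_map]
        rw [hQP, pvRepList, if_neg (fun hcon => hcon.2 hseen), pvRepList, List.append_nil]
        refine List.map_congr_left ?_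
        intro m hm
        obtain ⟨hmP, hmQ, -⟩ := pvRepList_mem r c G Q ∅ m hm
        simp only [Function.comp]
        by_cases hfm : f m = f p
        · have hconn_m : pvConn r c G m p := (hf m p hmP hpP).mp hfm
          have hmm0 : m = m0 := by
            by_contra hne
            have hsym : Symmetric (fun a b => ¬ pvConn r c G a b) := by
              intro a b hnab hba
              exact hnab (pvConn_symm r c G hba)
            have hpw := pvRepList_pairwise r c G Q ∅
              (fun a b ha _ => absurd ha (Finset.notMem_empty a))
            have := List.Pairwise.forall hsym hpw hm hm0 hne
            exact this (Relation.ReflTransGen.trans hconn_m (pvConn_symm r c G hconn0))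
          rw [if_pos (by simp [hfm]), pvPSum_append, pvPSum_single,
            if_pos ⟨h0, hfm.symm⟩, hmm0, hfeq]
        · rw [if_neg (by simp [hfm]), pvPSum_append, pvPSum_single,
            if_neg (fun hcon => hfm hcon.2.symm)]
          simp
      · -- a fresh component: p becomes its representative
        have hnotk : ∀ m ∈ pvRepList r c G Q ∅, f m ≠ f p := by
          intro m hm hfm
          obtain ⟨hmP, hmQ, -⟩ := pvRepList_mem r c G Q ∅ m hm
          have hconn_m : pvConn r c G m p := (hf m p hmP hpP).mp hfm
          have hmW : m ∈ pvWAcc r c G Q ∅ := pvWAcc_mem_of_mem r c G Q ∅ m hmQ hmP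
          exact hseen (pvWAcc_closed r c G Q ∅ hclosed m p hmW hconn_m)
        have hcont : d.contains (f p) = false := by
          rw [PySem.Dict.contains_eq_decide_mem_keys, hkeys]
          simp only [decide_eq_false_iff_not, List.mem_map]
          rintro ⟨m, hm, hfm⟩
          exact hnotk m hm hfm
        have hgetD : d.getD (f p) 0 = 0 := by
          rw [PySem.Dict.getD, (PySem.Dict.get?_eq_none_iff_not_mem_keys d (f p)).mpr]
          · rfl
          · rw [hkeys]
            simp only [List.mem_map]
            rintro ⟨m, hm, hfm⟩
            exact hnotk m hm hfm
        show (d.insert (f p) ((d.getD (f p) 0) + pvGet G p.1 p.2)).items = _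
        rw [PySem.Dict.items_insert_of_not_contains d _ hcont, hgetD, hd]
        rw [hQP, pvRepList, if_pos ⟨hpP, hseen⟩, pvRepList]
        rw [List.map_append]
        congr 1
        · refine List.map_congr_left ?_
          intro m hm
          rw [pvPSum_append, pvPSum_single, if_neg (fun hcon => hnotk m hm hcon.2.symm)]
          simp
        · simp only [List.map_cons, List.map_nil]
          have hps : pvPSum r c G f Q p = 0 := by
            unfold pvPSum
            have hfil : Q.filter (fun q => decide (0 < pvGet G q.1 q.2) && (f q == f p)) = [] := by
              rw [List.filter_eq_nil_iff]
              intro q hq hcon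
              simp only [Bool.and_eq_true, decide_eq_true_eq, beq_iff_eq] at hcon
              have hqP : pvPos r c G q := ⟨hQ q hq, hcon.1⟩
              have hconn_q : pvConn r c G q p := (hf q p hqP hpP).mp hcon.2
              have hqW : q ∈ pvWAcc r c G Q ∅ := pvWAcc_mem_of_mem r c G Q ∅ q hq hqP
              exact hseen (pvWAcc_closed r c G Q ∅ hclosed q p hqW hconn_q)
            rw [hfil]
            rfl
          rw [pvPSum_append, hps, pvPSum_single, if_pos ⟨h0, rfl⟩]
    have hres := ihL (Q ++ [p])
      ((if pvGet G p.1 p.2 > 0 then d.modify (f p) 0 (· + pvGet G p.1 p.2) else d))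
      (fun q hq => hL q (List.mem_cons_of_mem _ hq))
      (by
        intro q hq
        rcases List.mem_append.mp hq with h | h
        · exact hQ q h
        · simp only [List.mem_singleton] at h
          exact h ▸ hpInB)
      hstep
    rw [List.foldl_cons]
    rw [show Q ++ p :: L = (Q ++ [p]) ++ L from by simp]
    exact hres

lemma pvCells_nodup (r c : Nat) : (pvCells r c).Nodup := by
  unfold pvCells
  rw [List.nodup_flatMap]
  refine ⟨?_, ?_⟩
  · intro i _
    refine List.Nodup.map ?_ List.nodup_range
    intro a b hab
    simpa using hab
  · refine List.Pairwise.imp ?_ (List.pairwise_lt_range)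
    intro i j hij x hx1 hx2
    obtain ⟨a, _, rfl⟩ := List.mem_map.mp hx1
    obtain ⟨b, _, hba⟩ := List.mem_map.mp hx2
    have : j = i := congrArg Prod.fst hba
    omega

lemma psum_full (r c : Nat) (G : List (List Int)) (f : Nat × Nat → Nat)
    (hf : ∀ p q, pvPos r c G p → pvPos r c G q → (f p = f q ↔ pvConn r c G p q))
    (m : Nat × Nat) (hmP : pvPos r c G m) :
    pvPSum r c G f (pvCells r c) m = pvCompSum r c G m := by
  unfold pvPSum pvCompSum
  have hnd : ((pvCells r c).filter
      (fun q => decide (0 < pvGet G q.1 q.2) && (f q == f m))).Nodup :=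
    List.Nodup.filter _ (pvCells_nodup r c)
  rw [← List.sum_toFinset _ hnd]
  have hset : ((pvCells r c).filter
      (fun q => decide (0 < pvGet G q.1 q.2) && (f q == f m))).toFinset = pvComp r c G m := by
    ext q
    rw [List.mem_toFinset, List.mem_filter, mem_pvCells, mem_pvComp r c G m hmP]
    simp only [Bool.and_eq_true, decide_eq_true_eq, beq_iff_eq]
    constructor
    · rintro ⟨hin, hval, hfq⟩
      have hqP : pvPos r c G q := ⟨hin, hval⟩
      exact pvConn_symm r c G ((hf q m hqP hmP).mp hfq)
    · intro hconn
      have hqP : pvPos r c G q := pvConn_pos r c G hmP hconn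
      exact ⟨hqP.1, hqP.2, (hf q m hqP hmP).mpr (pvConn_symm r c G hconn)⟩
  rw [hset]

lemma digit_ge (ch : Char) (h1 : '0' ≤ ch) : 48 ≤ ch.toNat := by
  rw [Char.le_def] at h1
  exact h1

-- ===== VERDICT (by name: the statement is the Claim_ definition above) =====
theorem solution_spec : Claim_equal_solution := by
  unfold Claim_equal_solution
  intro maps hdom hpre
  unfold Spec_solution
  obtain ⟨hne, hallb⟩ := hpre
  have hrows : ∀ m ∈ maps, (maps.headD "").toList.length ≤ m.toList.length ∧
      ∀ ch ∈ m.toList, ch = 'X' ∨ ('0' ≤ ch ∧ ch ≤ '9') := by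
    intro m hm
    have hthis := List.all_eq_true.mp hallb m hm
    simp only [Bool.and_eq_true, beq_iff_eq, Bool.or_eq_true, decide_eq_true_eq,
      List.all_eq_true] at hthis
    refine ⟨hthis.1, ?_⟩
    intro ch hch
    rcases hthis.2 ch hch with h | h
    · exact Or.inl h
    · exact Or.inr h
  set r := maps.length with hr
  set c := (maps.headD "").toList.length with hc
  set G := maps.map (fun m => m.toList.map pvCellA) with hG
  -- basic facts about the converted grid
  have hGs : pvShape r c G := by
    refine ⟨by simp [hG, hr], ?_⟩
    intro row hrow
    rw [hG] at hrow
    obtain ⟨m, hm, rfl⟩ := List.mem_map.mp hrow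
    simpa using (hrows m hm).1
  have hGnn : ∀ i j, 0 ≤ pvGet G i j := by
    apply pvGet_nonneg
    intro row hrow x hx
    rw [hG] at hrow
    obtain ⟨m, hm, rfl⟩ := List.mem_map.mp hrow
    obtain ⟨ch, hch, rfl⟩ := List.mem_map.mp hx
    rcases (hrows m hm).2 ch hch with h | ⟨h1, h2⟩
    · simp [pvCellA, h]
    · unfold pvCellA
      split_ifs
      · exact le_refl 0
      · have := digit_ge ch h1
        omega
  have hcellsInB : ∀ p ∈ pvCells r c, pvInB r c p :=
    fun p hp => (mem_pvCells r c p).mp hp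
  -- ===== A: characterise the scan =====
  have hAfold := outerA_main r c G hGs hGnn (pvCells r c) ∅ G [] hcellsInB
    (fun p hp => absurd hp (Finset.notMem_empty p))
    (fun p q hp _ => absurd hp (Finset.notMem_empty p))
    hGs (fun i j => by simp)
  rw [List.nil_append] at hAfold
  have hAflat : ((List.range r).foldl (fun st i => (List.range c).foldl (fun st j =>
        if pvGet st.1 i j ≠ 0 then
          let q := pvFillA r c (5 * (r * c) + 4) st.1 [(i, j)] 0
          (q.2, st.2 ++ [q.1])
        else st) st) (G, ([] : List Int)))
      = (pvCells r c).foldl (fun st p =>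
        if pvGet st.1 p.1 p.2 ≠ 0 then
          let q := pvFillA r c (5 * (r * c) + 4) st.1 [(p.1, p.2)] 0
          (q.2, st.2 ++ [q.1])
        else st) (G, ([] : List Int)) :=
    foldl_range_range r c (fun st i j =>
        if pvGet st.1 i j ≠ 0 then
          let q := pvFillA r c (5 * (r * c) + 4) st.1 [(i, j)] 0
          (q.2, st.2 ++ [q.1])
        else st) (G, ([] : List Int))
  have hA : solution maps =
      (if (pvRepList r c G (pvCells r c) ∅).map (pvCompSum r c G) = [] then [-1]
       else PySem.List.sorted ((pvRepList r c G (pvCells r c) ∅).map (pvCompSum r c G))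
         (fun x => x) false) := by
    show (if ((List.range r).foldl (fun st i => (List.range c).foldl (fun st j =>
          if pvGet st.1 i j ≠ 0 then
            let q := pvFillA r c (5 * (r * c) + 4) st.1 [(i, j)] 0
            (q.2, st.2 ++ [q.1])
          else st) st) (G, ([] : List Int))).2 = [] then [-1]
        else PySem.List.sorted ((List.range r).foldl (fun st i => (List.range c).foldl (fun st j =>
          if pvGet st.1 i j ≠ 0 then
            let q := pvFillA r c (5 * (r * c) + 4) st.1 [(i, j)] 0
            (q.2, st.2 ++ [q.1])
          else st) st) (G, ([] : List Int))).2 (fun x => x) false) = _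
    rw [hAflat, hAfold]
  -- ===== B: characterise union-find and the sums dict =====
  have hBflat : ((List.range r).foldl (fun par i =>
        (List.range c).foldl (fun par j =>
          if pvGet G i j > 0 then
            let par1 := if i + 1 < r ∧ pvGet G (i + 1) j > 0 then
              pvUnionB par (r * c) (i * c + j) ((i + 1) * c + j) else par
            if j + 1 < c ∧ pvGet G i (j + 1) > 0 then
              pvUnionB par1 (r * c) (i * c + j) (i * c + j + 1) else par1
          else par) par) (List.range (r * c)))
      = (pvCells r c).foldl (fun par p => pvUStep r c (r * c) G par p.1 p.2)
          (List.range (r * c)) :=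
    foldl_range_range r c (fun par i j => pvUStep r c (r * c) G par i j)
      (List.range (r * c))
  have hf : ∀ p q, pvPos r c G p → pvPos r c G q →
      ((fun p : Nat × Nat => pvRootB
          ((pvCells r c).foldl (fun par p => pvUStep r c (r * c) G par p.1 p.2)
            (List.range (r * c))) (r * c) (p.1 * c + p.2)) p =
       (fun p : Nat × Nat => pvRootB
          ((pvCells r c).foldl (fun par p => pvUStep r c (r * c) G par p.1 p.2)
            (List.range (r * c))) (r * c) (p.1 * c + p.2)) q ↔ pvConn r c G p q) := by
    intro p q hp hq
    exact parF_rel_iff r c G p q hp hq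
  have hitems := dict_phase r c G _ hf (pvCells r c) [] PySem.Dict.empty
    hcellsInB (fun p hp => absurd hp (List.not_mem_nil)) (by rw [pvRepList]; rfl)
  rw [List.nil_append] at hitems
  have hBdictflat : ((List.range r).foldl (fun d i => (List.range c).foldl (fun d j =>
        if pvGet G i j > 0 then
          PySem.Dict.modify d (pvRootB
            ((pvCells r c).foldl (fun par p => pvUStep r c (r * c) G par p.1 p.2)
              (List.range (r * c))) (r * c) (i * c + j)) 0 (· + pvGet G i j)
        else d) d) (PySem.Dict.empty : PySem.Dict Nat Int))
      = (pvCells r c).foldl (fun d p =>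
        if pvGet G p.1 p.2 > 0 then
          PySem.Dict.modify d (pvRootB
            ((pvCells r c).foldl (fun par p => pvUStep r c (r * c) G par p.1 p.2)
              (List.range (r * c))) (r * c) (p.1 * c + p.2)) 0 (· + pvGet G p.1 p.2)
        else d) (PySem.Dict.empty : PySem.Dict Nat Int) :=
    foldl_range_range r c (fun d i j =>
        if pvGet G i j > 0 then
          PySem.Dict.modify d (pvRootB
            ((pvCells r c).foldl (fun par p => pvUStep r c (r * c) G par p.1 p.2)
              (List.range (r * c))) (r * c) (i * c + j)) 0 (· + pvGet G i j)
        else d) (PySem.Dict.empty : PySem.Dict Nat Int)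
  have hitems' : ((pvCells r c).foldl (fun d p =>
        if pvGet G p.1 p.2 > 0 then
          PySem.Dict.modify d (pvRootB
            ((pvCells r c).foldl (fun par p => pvUStep r c (r * c) G par p.1 p.2)
              (List.range (r * c))) (r * c) (p.1 * c + p.2)) 0 (· + pvGet G p.1 p.2)
        else d) (PySem.Dict.empty : PySem.Dict Nat Int)).items
      = (pvRepList r c G (pvCells r c) ∅).map (fun m =>
          (pvRootB ((pvCells r c).foldl (fun par p => pvUStep r c (r * c) G par p.1 p.2)
              (List.range (r * c))) (r * c) (m.1 * c + m.2),
           pvPSum r c G (fun p => pvRootB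
              ((pvCells r c).foldl (fun par p => pvUStep r c (r * c) G par p.1 p.2)
                (List.range (r * c))) (r * c) (p.1 * c + p.2)) (pvCells r c) m)) := hitems
  have hB : solution_alt maps =
      (if (pvRepList r c G (pvCells r c) ∅).map (pvCompSum r c G) = [] then [-1]
       else PySem.List.sorted ((pvRepList r c G (pvCells r c) ∅).map (pvCompSum r c G))
         (fun x => x) false) := by
    show (if ((List.range r).foldl (fun d i => (List.range c).foldl (fun d j =>
          if pvGet G i j > 0 then
            PySem.Dict.modify d (pvRootB ((List.range r).foldl (fun par i =>
              (List.range c).foldl (fun par j =>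
                if pvGet G i j > 0 then
                  let par1 := if i + 1 < r ∧ pvGet G (i + 1) j > 0 then
                    pvUnionB par (r * c) (i * c + j) ((i + 1) * c + j) else par
                  if j + 1 < c ∧ pvGet G i (j + 1) > 0 then
                    pvUnionB par1 (r * c) (i * c + j) (i * c + j + 1) else par1
                else par) par) (List.range (r * c))) (r * c) (i * c + j)) 0 (· + pvGet G i j)
          else d) d) (PySem.Dict.empty : PySem.Dict Nat Int)).size = 0 then [-1]
        else PySem.List.sorted ((List.range r).foldl (fun d i => (List.range c).foldl (fun d j =>
          if pvGet G i j > 0 then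
            PySem.Dict.modify d (pvRootB ((List.range r).foldl (fun par i =>
              (List.range c).foldl (fun par j =>
                if pvGet G i j > 0 then
                  let par1 := if i + 1 < r ∧ pvGet G (i + 1) j > 0 then
                    pvUnionB par (r * c) (i * c + j) ((i + 1) * c + j) else par
                  if j + 1 < c ∧ pvGet G i (j + 1) > 0 then
                    pvUnionB par1 (r * c) (i * c + j) (i * c + j + 1) else par1
                else par) par) (List.range (r * c))) (r * c) (i * c + j)) 0 (· + pvGet G i j)
          else d) d) (PySem.Dict.empty : PySem.Dict Nat Int)).values (fun x => x) false) = _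
    rw [hBflat, hBdictflat]
    rw [PySem.Dict.size, PySem.Dict.values, hitems', List.map_map, List.length_map]
    have hmapeq : (pvRepList r c G (pvCells r c) ∅).map
        ((fun x : Nat × Int => x.2) ∘ (fun m =>
          (pvRootB ((pvCells r c).foldl (fun par p => pvUStep r c (r * c) G par p.1 p.2)
              (List.range (r * c))) (r * c) (m.1 * c + m.2),
           pvPSum r c G (fun p => pvRootB
              ((pvCells r c).foldl (fun par p => pvUStep r c (r * c) G par p.1 p.2)
                (List.range (r * c))) (r * c) (p.1 * c + p.2)) (pvCells r c) m)))
        = (pvRepList r c G (pvCells r c) ∅).map (pvCompSum r c G) := by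
      refine List.map_congr_left ?_
      intro m hm
      obtain ⟨hmP, -, -⟩ := pvRepList_mem r c G (pvCells r c) ∅ m hm
      simp only [Function.comp]
      exact psum_full r c G _ hf m hmP
    rw [hmapeq]
    by_cases hnil : (pvRepList r c G (pvCells r c) ∅).map (pvCompSum r c G) = []
    · rw [if_pos hnil, if_pos (by simpa using congrArg List.length hnil)]
    · rw [if_neg hnil, if_neg (by
        intro hlen
        exact hnil (List.eq_nil_of_length_eq_zero (by simpa using hlen)))]
  rw [hA, hB]
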